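-- pv_equiv track=rewrite | github.com/sihyunkimm/Baekjoon-python | 1017.py | canMatch
-- ===== SOURCE A (Python) =====
-- def canMatch(numbers, primeSet):
--     n = len(numbers)
--     if n % 2 != 0 or n == 0:
--         return False
--
--     odd = [i for i in range(n) if numbers[i] % 2 == 1]
--     even = [i for i in range(n) if numbers[i] % 2 == 0]
--
--     if len(odd) != len(even):
--         return False
--
--     adj = [[] for _ in range(n)]
--     for i in odd:
--         for j in even:
--             if numbers[i] + numbers[j] in primeSet:
--                 adj[i].append(j)
--
--     # odd left, even right
--     matchEven = [-1] * n
--     matchOdd = [-1] * n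
--
--     def dfs(u, visited):
--         for v in adj[u]:
--             if visited[v]:
--                 continue
--             visited[v] = True
--             if matchEven[v] == -1 or dfs(matchEven[v], visited):
--                 matchEven[v] = u
--                 matchOdd[u] = v
--                 return True
--         return False
--
--     # 모든 odd 노드가 매칭되는지 확인
--     for u in odd:
--         visited = [False] * n
--         if not dfs(u, visited):
--             return False
--
--     return True
-- ===== SOURCE B (Python) =====
-- def canMatch(numbers, primeSet):
--     n = len(numbers)
--     if n == 0 or n % 2 == 1:
--         return False
--     odd = [i for i in range(n) if numbers[i] % 2 == 1]
--     even = [i for i in range(n) if numbers[i] % 2 == 0]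
--     if len(odd) != len(even):
--         return False
--
--     pairV = {}  # even index -> odd index it is matched to
--     for s in odd:
--         # breadth-first search over alternating paths from s for the nearest free even
--         parent = {}  # discovered even v -> (odd u that reached v, even u was matched through, or None)
--         queue = [(s, None)]
--         head = 0
--         goal = None
--         while head < len(queue) and goal is None:
--             u, pu = queue[head]
--             head += 1
--             for v in even:
--                 if v not in parent and numbers[u] + numbers[v] in primeSet:
--                     parent[v] = (u, pu)
--                     w = pairV.get(v)
--                     if w is None:
--                         goal = v
--                         break
--                     queue.append((w, v))
--         if goal is None:
--             return False
--         # flip the found alternating path back to s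
--         v = goal
--         while v is not None:
--             u, pv = parent[v]
--             pairV[v] = u
--             v = pv
--     return True
-- ===== Notes on version B (the rewrite author's own statement) =====
-- stated objective: alternative
-- what changed: B replaces A's recursive depth-first Kuhn augmentation (per-vertex recursive DFS mutating match arrays, over a precomputed adjacency list) with an iterative breadth-first search for a shortest augmenting path: a queue plus a parent map over alternating paths, path reconstruction by walking parent pointers, and an explicit flip loop over a single even->odd dict; no adjacency list is built and no recursion is used.
import Mathlib
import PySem

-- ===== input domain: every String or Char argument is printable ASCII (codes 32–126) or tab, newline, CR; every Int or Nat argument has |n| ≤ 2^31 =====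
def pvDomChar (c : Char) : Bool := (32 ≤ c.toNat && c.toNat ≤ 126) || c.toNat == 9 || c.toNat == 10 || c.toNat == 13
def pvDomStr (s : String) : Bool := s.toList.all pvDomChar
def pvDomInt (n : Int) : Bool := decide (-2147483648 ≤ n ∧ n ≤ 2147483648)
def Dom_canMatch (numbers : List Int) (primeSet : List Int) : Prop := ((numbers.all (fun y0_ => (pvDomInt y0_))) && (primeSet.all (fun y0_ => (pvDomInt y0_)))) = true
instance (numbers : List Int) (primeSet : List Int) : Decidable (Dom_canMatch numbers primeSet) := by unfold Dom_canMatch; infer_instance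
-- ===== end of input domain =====

-- B replaces A's recursive Kuhn DFS augmentation (over a precomputed adjacency list) by an
-- iterative shortest-augmenting-path BFS with a parent map and an explicit path-flip loop over
-- one even->odd dict; equal return value on all inputs (both decide existence of a perfect
-- odd/even matching).

-- ===== PORT A =====
-- Indexing numbers[i], adj[u], visited[v], matchEven[v] uses PySem.List.pyGetD / pySetD;
-- every index A uses is in range (0 ≤ i < len), where pyGetD/pySetD are Python-exact.
-- 'numbers[i] + numbers[j] in primeSet' (primeSet is a Python set of ints):
def pvPrimePair (numbers : List Int) (primeSet : List Int) (u v : Int) : Bool :=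
  primeSet.contains (PySem.List.pyGetD numbers u 0 + PySem.List.pyGetD numbers v 0)

-- odd = [i for i in range(n) if numbers[i] % 2 == 1] (same line occurs in A and in B)
def pvOddA (numbers : List Int) : List Int :=
  (PySem.List.pyRange 0 numbers.length 1).filter
    (fun i => PySem.Int.mod (PySem.List.pyGetD numbers i 0) 2 == 1)

def pvEvenA (numbers : List Int) : List Int :=
  (PySem.List.pyRange 0 numbers.length 1).filter
    (fun i => PySem.Int.mod (PySem.List.pyGetD numbers i 0) 2 == 0)

def pvAdjA (numbers primeSet : List Int) : List (List Int) :=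
  (pvOddA numbers).foldl (fun adj i =>
    (pvEvenA numbers).foldl (fun adj j =>
      if pvPrimePair numbers primeSet i j then
        PySem.List.pySetD adj i (PySem.List.pyGetD adj i [] ++ [j])
      else adj) adj)
    (List.replicate numbers.length [])

mutual
-- dfs(u, visited): fuel only makes the recursion structural; with fuel = n+1 it is
-- never exhausted (each nested call has marked one more visited entry among n).
def pvDfsA (adj : List (List Int)) (fuel : Nat) (u : Int)
    (vis : List Bool) (mE mO : List Int) : Bool × List Bool × List Int × List Int :=
  match fuel with
  | 0 => (false, vis, mE, mO)
  | f + 1 => pvDfsALoop adj f u (PySem.List.pyGetD adj u []) vis mE mO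
termination_by (fuel, 0)

-- 'for v in adj[u]: …' with visited/matchEven/matchOdd threaded as Python mutates them
def pvDfsALoop (adj : List (List Int)) (f : Nat) (u : Int) (ns : List Int)
    (vis : List Bool) (mE mO : List Int) : Bool × List Bool × List Int × List Int :=
  match ns with
  | [] => (false, vis, mE, mO)
  | v :: rest =>
    if PySem.List.pyGetD vis v false then pvDfsALoop adj f u rest vis mE mO
    else
      let vis' := PySem.List.pySetD vis v true
      let w := PySem.List.pyGetD mE v (-1)
      if w == -1 then
        (true, vis', PySem.List.pySetD mE v u, PySem.List.pySetD mO u v)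
      else
        match pvDfsA adj f w vis' mE mO with
        | (true, vis2, mE2, mO2) =>
          (true, vis2, PySem.List.pySetD mE2 v u, PySem.List.pySetD mO2 u v)
        | (false, vis2, mE2, mO2) => pvDfsALoop adj f u rest vis2 mE2 mO2
termination_by (f, ns.length + 1)
end

-- 'for u in odd: visited = [False]*n; if not dfs(u, visited): return False'
def pvOuterA (adj : List (List Int)) (nn : Nat) (mE mO : List Int) : List Int → Bool
  | [] => true
  | u :: us =>
    match pvDfsA adj (nn + 1) u (List.replicate nn false) mE mO with
    | (true, _, mE', mO') => pvOuterA adj nn mE' mO' us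
    | (false, _, _, _) => false

def canMatch (numbers : List Int) (primeSet : List Int) : Bool :=
  let n : Int := numbers.length
  if PySem.Int.mod n 2 != 0 || n == 0 then false
  else if (pvOddA numbers).length != (pvEvenA numbers).length then false
  else
    pvOuterA (pvAdjA numbers primeSet) numbers.length
      (List.replicate numbers.length (-1)) (List.replicate numbers.length (-1))
      (pvOddA numbers)

-- ===== PORT B =====
-- the inner 'for v in even: …' of one dequeued (u, pu); returns (parent, appended queue
-- entries, goal); breaks (returns) as soon as a free even is found
def pvScanB (numbers primeSet : List Int) (pairV : PySem.Dict Int Int) (u : Int)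
    (pu : Option Int) : List Int → PySem.Dict Int (Int × Option Int) →
    List (Int × Option Int) → PySem.Dict Int (Int × Option Int) × List (Int × Option Int) × Option Int
  | [], parent, apps => (parent, apps, none)
  | v :: vs, parent, apps =>
    if !(parent.contains v) && pvPrimePair numbers primeSet u v then
      let parent' := parent.insert v (u, pu)
      match pairV.get? v with
      | none => (parent', apps, some v)
      | some w => pvScanB numbers primeSet pairV u pu vs parent' (apps ++ [(w, some v)])
    else pvScanB numbers primeSet pairV u pu vs parent apps

-- 'while head < len(queue) and goal is None': the not-yet-dequeued tail of the queue is the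
-- argument; fuel n+2 is never exhausted (dequeues ≤ 1 + number of evens)
def pvBfsB (numbers primeSet evens : List Int) (pairV : PySem.Dict Int Int) :
    Nat → List (Int × Option Int) → PySem.Dict Int (Int × Option Int) →
    PySem.Dict Int (Int × Option Int) × Option Int
  | _, [], parent => (parent, none)
  | 0, _ :: _, parent => (parent, none)
  | f + 1, (u, pu) :: rest, parent =>
    match pvScanB numbers primeSet pairV u pu evens parent [] with
    | (parent', _, some g) => (parent', some g)
    | (parent', apps, none) => pvBfsB numbers primeSet evens pairV f (rest ++ apps) parent'

-- 'while v is not None: u, pv = parent[v]; pairV[v] = u; v = pv' (fuel = len(parent)+1,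
-- never exhausted: the chain moves to strictly earlier-discovered evens)
def pvFlipB (parent : PySem.Dict Int (Int × Option Int)) :
    Nat → Option Int → PySem.Dict Int Int → PySem.Dict Int Int
  | _, none, pairV => pairV
  | 0, some _, pairV => pairV
  | f + 1, some v, pairV =>
    match parent.get? v with
    | none => pairV  -- unreachable: every chain member was put into parent
    | some (u, pv) => pvFlipB parent f pv (pairV.insert v u)

-- 'for s in odd: …  return True'
def pvOuterB (numbers primeSet evens : List Int) (nn : Nat) :
    List Int → PySem.Dict Int Int → Bool
  | [], _ => true
  | s :: ss, pairV =>
    match pvBfsB numbers primeSet evens pairV (nn + 2) [(s, none)] PySem.Dict.empty with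
    | (_, none) => false
    | (parent, some g) =>
      pvOuterB numbers primeSet evens nn ss
        (pvFlipB parent (parent.size + 1) (some g) pairV)

def canMatch_alt (numbers : List Int) (primeSet : List Int) : Bool :=
  let n : Int := numbers.length
  if n == 0 || PySem.Int.mod n 2 == 1 then false
  else if (pvOddA numbers).length != (pvEvenA numbers).length then false
  else pvOuterB numbers primeSet (pvEvenA numbers) numbers.length (pvOddA numbers) PySem.Dict.empty

-- ===== PRECONDITION & SPEC =====
def Spec_canMatch (numbers : List Int) (primeSet : List Int) (out : Bool) : Prop := out = canMatch_alt numbers primeSet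
instance (numbers : List Int) (primeSet : List Int) (out : Bool) : Decidable (Spec_canMatch numbers primeSet out) := by unfold Spec_canMatch; infer_instance

-- ===== CLAIM (what is proved, stated in full; the proofs are below) =====
def Claim_equal_canMatch : Prop := ∀ (numbers : List Int) (primeSet : List Int), Dom_canMatch numbers primeSet → Spec_canMatch numbers primeSet (canMatch numbers primeSet)

-- ===== LEMMAS AND PROOFS =====

-- proof-only definitions ----------------------------------------------------

-- the matching state abstracted as a partial map even-index -> odd-index
def pvCnt (E : List Int) (g : Int → Option Int) (x : Int) : Nat :=
  E.countP (fun v => g v == some x)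

-- A's matchEven array as such a map
def pvGA (mE : List Int) (v : Int) : Option Int :=
  if PySem.List.pyGetD mE v (-1) == -1 then none else some (PySem.List.pyGetD mE v (-1))

def pvValid (numbers primeSet : List Int) (g : Int → Option Int) : Prop :=
  ∀ v ∈ pvEvenA numbers, ∀ w, g v = some w →
    w ∈ pvOddA numbers ∧ pvPrimePair numbers primeSet w v = true

def pvCounts (numbers : List Int) (g : Int → Option Int) (P : List Int) : Prop :=
  ∀ x ∈ pvOddA numbers, pvCnt (pvEvenA numbers) g x = if x ∈ P then 1 else 0

-- "a perfect matching of the odd indices into the even indices exists"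
def pvCov (numbers primeSet : List Int) : Prop :=
  ∃ M : List (Int × Int),
    (∀ p ∈ M, p.1 ∈ pvOddA numbers ∧ p.2 ∈ pvEvenA numbers ∧
      pvPrimePair numbers primeSet p.1 p.2 = true) ∧
    (M.map Prod.fst).Nodup ∧ (M.map Prod.snd).Nodup ∧
    ∀ u ∈ pvOddA numbers, u ∈ M.map Prod.fst

def pvUnvis (numbers : List Int) (vis : List Bool) : Nat :=
  (pvEvenA numbers).countP (fun v => !PySem.List.pyGetD vis v false)

-- small index lemmas --------------------------------------------------------

lemma pvGetD_setD_self {α : Type} (xs : List α) (i : Int) (a d : α)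
    (h0 : 0 ≤ i) (h : i.toNat < xs.length) :
    PySem.List.pyGetD (PySem.List.pySetD xs i a) i d = a := by
  rw [PySem.List.pySetD_of_nonneg _ _ h0, PySem.List.pyGetD_of_nonneg _ _ h0]
  simp [List.getD, h]

lemma pvGetD_setD_ne {α : Type} (xs : List α) (i j : Int) (a : α) (d : α)
    (h0 : 0 ≤ i) (h1 : 0 ≤ j) (hne : i ≠ j) :
    PySem.List.pyGetD (PySem.List.pySetD xs i a) j d = PySem.List.pyGetD xs j d := by
  rw [PySem.List.pySetD_of_nonneg _ _ h0, PySem.List.pyGetD_of_nonneg _ _ h1,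
      PySem.List.pyGetD_of_nonneg _ _ h1]
  have : i.toNat ≠ j.toNat := by omega
  simp [List.getD, List.getElem?_set_ne this]

lemma pvGetD_replicate_const {α : Type} (k : Nat) (c : α) (i : Int) :
    PySem.List.pyGetD (List.replicate k c) i c = c := by
  unfold PySem.List.pyGetD
  rcases h : PySem.List.pyGet? (List.replicate k c) i with _ | x
  · rfl
  · simpa using List.eq_of_mem_replicate (PySem.List.mem_of_pyGet?_eq_some _ h)

lemma pvModTwo (x : Int) : PySem.Int.mod x 2 = 0 ∨ PySem.Int.mod x 2 = 1 := by
  have h1 := PySem.Int.mod_nonneg x (show (0:Int) < 2 by norm_num)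
  have h2 := PySem.Int.mod_lt x (show (0:Int) < 2 by norm_num)
  omega

lemma pvOdd_bounds (numbers : List Int) {u : Int} (h : u ∈ pvOddA numbers) :
    0 ≤ u ∧ u.toNat < numbers.length := by
  unfold pvOddA at h
  have := (List.mem_filter.1 h).1
  rw [PySem.List.mem_pyRange_one] at this
  omega

lemma pvEven_bounds (numbers : List Int) {v : Int} (h : v ∈ pvEvenA numbers) :
    0 ≤ v ∧ v.toNat < numbers.length := by
  unfold pvEvenA at h
  have := (List.mem_filter.1 h).1
  rw [PySem.List.mem_pyRange_one] at this
  omega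

lemma pvOdd_nodup (numbers : List Int) : (pvOddA numbers).Nodup :=
  (PySem.List.nodup_pyRange_one 0 numbers.length).filter _

lemma pvEven_nodup (numbers : List Int) : (pvEvenA numbers).Nodup :=
  (PySem.List.nodup_pyRange_one 0 numbers.length).filter _

lemma pvEven_len_le (numbers : List Int) : (pvEvenA numbers).length ≤ numbers.length := by
  refine le_trans (List.length_filter_le _ _) (le_of_eq ?_)
  simp [PySem.List.pyRange]
  rintro rfl
  rfl

-- counting lemmas ------------------------------------------------------------

lemma pvCountP_update {E : List Int} (hnd : E.Nodup) {v : Int} (hv : v ∈ E)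
    (p q : Int → Bool) (h : ∀ t ∈ E, t ≠ v → p t = q t) :
    E.countP q + (if p v then 1 else 0) = E.countP p + (if q v then 1 else 0) := by
  induction E with
  | nil => cases hv
  | cons a E ih =>
    obtain ⟨ha, hnd'⟩ := List.nodup_cons.1 hnd
    simp only [List.countP_cons]
    by_cases hva : v = a
    · subst hva
      have heq : E.countP q = E.countP p := by
        apply List.countP_congr
        intro t ht
        rw [h t (List.mem_cons_of_mem _ ht) (fun e => ha (e ▸ ht))]
      rw [heq]
      cases hq : q v <;> cases hp : p v <;> simp [hq, hp] <;> omega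
    · have hv' : v ∈ E := (List.mem_cons.1 hv).resolve_left hva
      have hpq : p a = q a := h a (List.mem_cons_self ..) (fun e => hva e.symm)
      have hih := ih hnd' hv' (fun t ht htv => h t (List.mem_cons_of_mem _ ht) htv)
      rw [hpq]
      cases hqa : q a <;> simp <;> omega

lemma pvCnt_update {E : List Int} (hnd : E.Nodup) {v : Int} (hv : v ∈ E)
    (g g' : Int → Option Int) (h : ∀ t ∈ E, t ≠ v → g t = g' t) (x : Int) :
    pvCnt E g' x + (if g v = some x then 1 else 0) =
      pvCnt E g x + (if g' v = some x then 1 else 0) := by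
  have := pvCountP_update hnd hv (fun t => g t == some x) (fun t => g' t == some x)
    (fun t ht htv => by show (g t == some x) = (g' t == some x); rw [h t ht htv])
  unfold pvCnt
  simpa [beq_iff_eq] using this

lemma pvTwo_le_countP {E : List Int} (hnd : E.Nodup) {a b : Int} (hab : a ≠ b)
    (ha : a ∈ E) (hb : b ∈ E) {p : Int → Bool} (hpa : p a = true) (hpb : p b = true) :
    2 ≤ E.countP p := by
  have hsub : [a, b] ⊆ E.filter p := by
    intro x hx
    rcases List.mem_pair.1 hx with rfl | rfl <;> exact List.mem_filter.2 ⟨by assumption, by assumption⟩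
  have hnd2 : ([a, b] : List Int).Nodup := by simp [hab]
  have := (hnd2.subperm hsub).length_le
  simpa [List.countP_eq_length_filter] using this

-- the Hall-type certificate and the two spec directions ----------------------

lemma pvNoCov (numbers primeSet : List Int) (S V : List Int)
    (hS : ∀ x ∈ S, x ∈ pvOddA numbers) (hSnd : S.Nodup)
    (hlen : V.length < S.length)
    (hN : ∀ x ∈ S, ∀ v ∈ pvEvenA numbers,
      pvPrimePair numbers primeSet x v = true → v ∈ V) :
    ¬ pvCov numbers primeSet := by
  rintro ⟨M, hM, hfnd, hsnd, hcov⟩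
  have hTsub : ∀ p ∈ M.filter (fun p => decide (p.1 ∈ S)), p ∈ M ∧ p.1 ∈ S := by
    intro p hp
    have := List.mem_filter.1 hp
    exact ⟨this.1, by simpa using this.2⟩
  have hsndsub : ((M.filter (fun p => decide (p.1 ∈ S))).map Prod.snd).Sublist
      (M.map Prod.snd) := List.filter_sublist.map _
  have hTnd : ((M.filter (fun p => decide (p.1 ∈ S))).map Prod.snd).Nodup :=
    hsnd.sublist hsndsub
  have hTV : ∀ y ∈ (M.filter (fun p => decide (p.1 ∈ S))).map Prod.snd, y ∈ V := by
    intro y hy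
    obtain ⟨p, hp, rfl⟩ := List.mem_map.1 hy
    obtain ⟨hpM, hpS⟩ := hTsub p hp
    obtain ⟨h1, h2, h3⟩ := hM p hpM
    exact hN p.1 hpS p.2 h2 h3
  have hTle : (M.filter (fun p => decide (p.1 ∈ S))).length ≤ V.length := by
    have := (hTnd.subperm hTV).length_le
    simpa using this
  have hSsub : ∀ x ∈ S, x ∈ (M.filter (fun p => decide (p.1 ∈ S))).map Prod.fst := by
    intro x hx
    obtain ⟨p, hpM, hpx⟩ := List.mem_map.1 (hcov x (hS x hx))
    exact List.mem_map.2 ⟨p, List.mem_filter.2 ⟨hpM, by simp [hpx, hx]⟩, hpx⟩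
  have hSle : S.length ≤ (M.filter (fun p => decide (p.1 ∈ S))).length := by
    have := (hSnd.subperm hSsub).length_le
    simpa using this
  omega

lemma pvNoCov_of_state (numbers primeSet : List Int) (g : Int → Option Int)
    (P : List Int) (s : Int) (V : List Int)
    (hval : pvValid numbers primeSet g) (hcnt : pvCounts numbers g P)
    (hs : s ∈ pvOddA numbers) (hsP : s ∉ P)
    (hVnd : V.Nodup) (hVE : ∀ v ∈ V, v ∈ pvEvenA numbers)
    (hC1 : ∀ v ∈ pvEvenA numbers, pvPrimePair numbers primeSet s v = true → v ∈ V)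
    (hC2 : ∀ v ∈ V, ∃ w, g v = some w ∧ ∀ v' ∈ pvEvenA numbers,
      pvPrimePair numbers primeSet w v' = true → v' ∈ V) :
    ¬ pvCov numbers primeSet := by
  intro hCov
  have hsome : ∀ v ∈ V, ∃ w, g v = some w ∧ (g v).getD 0 = w := by
    intro v hv
    obtain ⟨w, hw, _⟩ := hC2 v hv
    exact ⟨w, hw, by rw [hw]; rfl⟩
  have hmemL : ∀ y ∈ V.map (fun v => (g v).getD 0), ∃ v ∈ V, g v = some y := by
    intro y hy
    obtain ⟨v, hv, rfl⟩ := List.mem_map.1 hy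
    obtain ⟨w, hw, he⟩ := hsome v hv
    exact ⟨v, hv, by simp [hw]⟩
  have hLO : ∀ y ∈ V.map (fun v => (g v).getD 0), y ∈ pvOddA numbers := by
    intro y hy
    obtain ⟨v, hv, hgv⟩ := hmemL y hy
    exact (hval v (hVE v hv) y hgv).1
  have hinj : ∀ v1 ∈ V, ∀ v2 ∈ V, (g v1).getD 0 = (g v2).getD 0 → v1 = v2 := by
    intro v1 h1 v2 h2 heq
    by_contra hne
    obtain ⟨w1, hw1, e1⟩ := hsome v1 h1
    obtain ⟨w2, hw2, e2⟩ := hsome v2 h2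
    have hw : w2 = w1 := by rw [← e1, ← e2, heq]
    have h2le : 2 ≤ pvCnt (pvEvenA numbers) g w1 := by
      unfold pvCnt
      exact pvTwo_le_countP (pvEven_nodup numbers) hne (hVE _ h1) (hVE _ h2)
        (by simp [hw1]) (by simp [hw2, hw])
    have hO1 : w1 ∈ pvOddA numbers := (hval v1 (hVE _ h1) w1 hw1).1
    have := hcnt w1 hO1
    by_cases hP : w1 ∈ P <;> simp [hP] at this <;> omega
  have hLnd : (V.map (fun v => (g v).getD 0)).Nodup := List.Nodup.map_on hinj hVnd
  have hsL : s ∉ V.map (fun v => (g v).getD 0) := by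
    intro hs'
    obtain ⟨v, hv, hgv⟩ := hmemL s hs'
    have h1 : 0 < pvCnt (pvEvenA numbers) g s := by
      unfold pvCnt
      exact List.countP_pos_iff.2 ⟨v, hVE _ hv, by simp [hgv]⟩
    have := hcnt s hs
    simp [hsP] at this
    omega
  refine pvNoCov numbers primeSet (s :: V.map (fun v => (g v).getD 0)) V ?_ ?_ ?_ ?_ hCov
  · intro x hx
    rcases List.mem_cons.1 hx with rfl | hx'
    · exact hs
    · exact hLO x hx'
  · exact List.nodup_cons.2 ⟨hsL, hLnd⟩
  · simp
  · intro x hx v hv he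
    rcases List.mem_cons.1 hx with rfl | hx'
    · exact hC1 v hv he
    · obtain ⟨v0, hv0, hgv0⟩ := hmemL x hx'
      obtain ⟨w, hw, hcl⟩ := hC2 v0 hv0
      have : w = x := by rw [hw] at hgv0; exact (Option.some_inj.1 hgv0)
      exact hcl v hv (this ▸ he)

lemma pvCov_of_full (numbers primeSet : List Int) (g : Int → Option Int)
    (hval : pvValid numbers primeSet g)
    (hcnt : pvCounts numbers g (pvOddA numbers)) :
    pvCov numbers primeSet := by
  have hsnd : ∀ (E' : List Int),
      ((E'.filterMap (fun v => (g v).map (fun w => (w, v)))).map Prod.snd)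
        = E'.filter (fun v => (g v).isSome) := by
    intro E'
    induction E' with
    | nil => rfl
    | cons a E' ih =>
      cases hga : g a <;>
        simp [List.filterMap_cons, hga, ih, List.filter_cons]
  have hfst : ∀ (E' : List Int) (x : Int),
      (((E'.filterMap (fun v => (g v).map (fun w => (w, v)))).map Prod.fst).count x)
        = E'.countP (fun v => g v == some x) := by
    intro E' x
    induction E' with
    | nil => rfl
    | cons a E' ih =>
      cases hga : g a with
      | none => simp [List.filterMap_cons, hga, ih, List.countP_cons]
      | some w =>
        by_cases hwx : w = x
        · subst hwx
          simp [List.filterMap_cons, hga, List.count_cons, ih, List.countP_cons]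
        · simp [List.filterMap_cons, hga, List.count_cons, ih, List.countP_cons, hwx,
            Ne.symm hwx]
  have hmem : ∀ p ∈ (pvEvenA numbers).filterMap (fun v => (g v).map (fun w => (w, v))),
      p.2 ∈ pvEvenA numbers ∧ g p.2 = some p.1 := by
    intro p hp
    obtain ⟨a, ha, hfa⟩ := List.mem_filterMap.1 hp
    rcases hga : g a with _ | w
    · rw [hga] at hfa; exact absurd hfa (by simp)
    · rw [hga] at hfa
      simp only [Option.map_some] at hfa
      cases hfa
      exact ⟨ha, hga⟩
  refine ⟨(pvEvenA numbers).filterMap (fun v => (g v).map (fun w => (w, v))), ?_, ?_, ?_, ?_⟩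
  · intro p hp
    obtain ⟨hpe, hpg⟩ := hmem p hp
    obtain ⟨h1, h2⟩ := hval p.2 hpe p.1 hpg
    exact ⟨h1, hpe, h2⟩
  · rw [List.nodup_iff_count_le_one]
    intro a
    by_cases haO : a ∈ pvOddA numbers
    · rw [hfst]
      have := hcnt a haO
      unfold pvCnt at this
      simp [haO] at this
      omega
    · by_cases hmem' : a ∈ ((pvEvenA numbers).filterMap
          (fun v => (g v).map (fun w => (w, v)))).map Prod.fst
      · obtain ⟨p, hp, hpa⟩ := List.mem_map.1 hmem'
        obtain ⟨hpe, hpg⟩ := hmem p hp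
        exact absurd ((hval p.2 hpe p.1 hpg).1) (hpa ▸ haO)
      · rw [List.count_eq_zero_of_not_mem hmem']
        omega
  · rw [hsnd]
    exact (pvEven_nodup numbers).filter _
  · intro u hu
    have := hcnt u hu
    simp [hu] at this
    unfold pvCnt at this
    have hpos : 0 < (pvEvenA numbers).countP (fun v => g v == some u) := by omega
    obtain ⟨v, hv, hgv⟩ := List.countP_pos_iff.1 hpos
    have hgv' : g v = some u := by simpa using hgv
    refine List.mem_map.2 ⟨(u, v), List.mem_filterMap.2 ⟨v, hv, by rw [hgv']; rfl⟩, rfl⟩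

-- adjacency list of port A ----------------------------------------------------

lemma pvInnerAdj (numbers primeSet : List Int) (i : Int) (h0 : 0 ≤ i) :
    ∀ (js : List Int) (adj : List (List Int)), i.toNat < adj.length →
      js.foldl (fun adj j => if pvPrimePair numbers primeSet i j then
          PySem.List.pySetD adj i (PySem.List.pyGetD adj i [] ++ [j]) else adj) adj
      = PySem.List.pySetD adj i
          (PySem.List.pyGetD adj i [] ++ js.filter (fun j => pvPrimePair numbers primeSet i j)) := by
  intro js
  induction js with
  | nil =>
    intro adj hlen
    simp only [List.foldl_nil, List.filter_nil, List.append_nil]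
    rw [PySem.List.pySetD_of_nonneg _ _ h0, PySem.List.pyGetD_of_nonneg _ _ h0,
        List.getD_eq_getElem _ _ hlen, List.set_getElem_self hlen]
  | cons j js ih =>
    intro adj hlen
    rw [List.foldl_cons, List.filter_cons]
    by_cases hc : pvPrimePair numbers primeSet i j
    · simp only [hc, if_true]
      have hlen' : i.toNat < (PySem.List.pySetD adj i (PySem.List.pyGetD adj i [] ++ [j])).length := by
        rw [PySem.List.length_pySetD]; exact hlen
      rw [ih _ hlen', pvGetD_setD_self _ _ _ _ h0 hlen]
      rw [PySem.List.pySetD_of_nonneg _ _ h0, PySem.List.pySetD_of_nonneg _ _ h0,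
          PySem.List.pySetD_of_nonneg _ _ h0, List.set_set, List.append_assoc, List.singleton_append]
    · simp only [hc, Bool.false_eq_true, if_false]
      exact ih _ hlen

lemma pvOuterAdj (numbers primeSet E : List Int) :
    ∀ (us : List Int) (adj : List (List Int)), us.Nodup →
      (∀ u ∈ us, 0 ≤ u ∧ u.toNat < adj.length) →
      (us.foldl (fun adj i =>
          E.foldl (fun adj j => if pvPrimePair numbers primeSet i j then
            PySem.List.pySetD adj i (PySem.List.pyGetD adj i [] ++ [j]) else adj) adj) adj).length
        = adj.length ∧
      ∀ t : Int, 0 ≤ t →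
        PySem.List.pyGetD (us.foldl (fun adj i =>
          E.foldl (fun adj j => if pvPrimePair numbers primeSet i j then
            PySem.List.pySetD adj i (PySem.List.pyGetD adj i [] ++ [j]) else adj) adj) adj) t []
        = if t ∈ us then
            PySem.List.pyGetD adj t [] ++ E.filter (fun j => pvPrimePair numbers primeSet t j)
          else PySem.List.pyGetD adj t [] := by
  intro us
  induction us with
  | nil => intro adj _ _; exact ⟨rfl, fun t _ => by simp⟩
  | cons u us ih =>
    intro adj hnd hb
    obtain ⟨hnd1, hnd2⟩ := List.nodup_cons.1 hnd
    have hu := hb u (List.mem_cons_self ..)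
    rw [List.foldl_cons]
    have hinner := pvInnerAdj numbers primeSet u hu.1 E adj hu.2
    have hlen' : (E.foldl (fun adj j => if pvPrimePair numbers primeSet u j then
        PySem.List.pySetD adj u (PySem.List.pyGetD adj u [] ++ [j]) else adj) adj).length
        = adj.length := by rw [hinner, PySem.List.length_pySetD]
    have hrec := ih _ hnd2 (fun x hx => ⟨(hb x (List.mem_cons_of_mem _ hx)).1, by
      rw [hlen']; exact (hb x (List.mem_cons_of_mem _ hx)).2⟩)
    refine ⟨hrec.1.trans hlen', ?_⟩
    intro t ht
    rw [hrec.2 t ht]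
    by_cases htu : t ∈ us
    · have htne : u ≠ t := fun h => hnd1 (h ▸ htu)
      simp only [htu, if_true, List.mem_cons, or_true]
      rw [hinner, pvGetD_setD_ne _ _ _ _ _ hu.1 ht htne]
    · by_cases hteq : t = u
      · subst hteq
        simp only [htu, if_false, List.mem_cons, true_or, if_true]
        rw [hinner, pvGetD_setD_self _ _ _ _ hu.1 hu.2]
      · have : t ∉ u :: us := by simp [hteq, htu]
        simp only [htu, if_false, this]
        rw [hinner, pvGetD_setD_ne _ _ _ _ _ hu.1 ht (fun h => hteq h.symm)]

lemma pvAdjA_spec (numbers primeSet : List Int) :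
    ∀ u ∈ pvOddA numbers,
      PySem.List.pyGetD (pvAdjA numbers primeSet) u []
        = (pvEvenA numbers).filter (fun v => pvPrimePair numbers primeSet u v) := by
  intro u hu
  unfold pvAdjA
  have hnd : (pvOddA numbers).Nodup := pvOdd_nodup numbers
  have hb : ∀ x ∈ pvOddA numbers,
      0 ≤ x ∧ x.toNat < (List.replicate numbers.length ([] : List Int)).length := by
    intro x hx
    have := pvOdd_bounds numbers hx
    simpa using this
  have h := (pvOuterAdj numbers primeSet (pvEvenA numbers) (pvOddA numbers) _ hnd hb).2
    u (pvOdd_bounds numbers hu).1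
  rw [h]
  simp only [hu, if_true]
  rw [pvGetD_replicate_const, List.nil_append]

-- the A-side DFS: post-conditions ---------------------------------------------

def pvAPostCore (numbers primeSet : List Int) (u : Int) (vis : List Bool) (mE mO : List Int)
    (r : Bool × List Bool × List Int × List Int) : Prop :=
  (r.1 = true →
    r.2.2.1.length = mE.length ∧
    (∀ v ∈ pvEvenA numbers, PySem.List.pyGetD vis v false = true →
      PySem.List.pyGetD r.2.2.1 v (-1) = PySem.List.pyGetD mE v (-1)) ∧
    pvValid numbers primeSet (pvGA r.2.2.1) ∧
    (∀ x : Int, pvCnt (pvEvenA numbers) (pvGA r.2.2.1) x =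
      pvCnt (pvEvenA numbers) (pvGA mE) x + (if x = u then 1 else 0))) ∧
  (r.1 = false →
    r.2.2.1 = mE ∧ r.2.2.2 = mO ∧ r.2.1.length = vis.length ∧
    (∀ v ∈ pvEvenA numbers, PySem.List.pyGetD vis v false = true →
      PySem.List.pyGetD r.2.1 v false = true))

-- the closure properties of a failed search, available when fuel is sufficient
def pvAClosure (numbers primeSet : List Int) (vis : List Bool) (mE : List Int)
    (r : Bool × List Bool × List Int × List Int) : Prop :=
  ∀ v ∈ pvEvenA numbers, PySem.List.pyGetD r.2.1 v false = true →
    PySem.List.pyGetD vis v false = true ∨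
    ∃ w, pvGA mE v = some w ∧ ∀ v' ∈ pvEvenA numbers,
      pvPrimePair numbers primeSet w v' = true →
        PySem.List.pyGetD r.2.1 v' false = true

-- unfolding equations for the A loop
lemma pvDfsALoop_visited (adj : List (List Int)) (f : Nat) (u v : Int) (rest : List Int)
    (vis : List Bool) (mE mO : List Int) (h : PySem.List.pyGetD vis v false = true) :
    pvDfsALoop adj f u (v :: rest) vis mE mO = pvDfsALoop adj f u rest vis mE mO := by
  simp [pvDfsALoop, h]

lemma pvDfsALoop_free (adj : List (List Int)) (f : Nat) (u v : Int) (rest : List Int)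
    (vis : List Bool) (mE mO : List Int) (h : PySem.List.pyGetD vis v false = false)
    (h2 : (PySem.List.pyGetD mE v (-1) == -1) = true) :
    pvDfsALoop adj f u (v :: rest) vis mE mO =
      (true, PySem.List.pySetD vis v true, PySem.List.pySetD mE v u,
        PySem.List.pySetD mO u v) := by
  simp [pvDfsALoop, h, h2]

lemma pvDfsALoop_matched_true (adj : List (List Int)) (f : Nat) (u v : Int) (rest : List Int)
    (vis vis2 : List Bool) (mE mO mE2 mO2 : List Int)
    (h : PySem.List.pyGetD vis v false = false)
    (h2 : (PySem.List.pyGetD mE v (-1) == -1) = false)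
    (hr : pvDfsA adj f (PySem.List.pyGetD mE v (-1)) (PySem.List.pySetD vis v true) mE mO
      = (true, vis2, mE2, mO2)) :
    pvDfsALoop adj f u (v :: rest) vis mE mO =
      (true, vis2, PySem.List.pySetD mE2 v u, PySem.List.pySetD mO2 u v) := by
  simp [pvDfsALoop, h, h2, hr]

lemma pvDfsALoop_matched_false (adj : List (List Int)) (f : Nat) (u v : Int) (rest : List Int)
    (vis vis2 : List Bool) (mE mO mE2 mO2 : List Int)
    (h : PySem.List.pyGetD vis v false = false)
    (h2 : (PySem.List.pyGetD mE v (-1) == -1) = false)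
    (hr : pvDfsA adj f (PySem.List.pyGetD mE v (-1)) (PySem.List.pySetD vis v true) mE mO
      = (false, vis2, mE2, mO2)) :
    pvDfsALoop adj f u (v :: rest) vis mE mO = pvDfsALoop adj f u rest vis2 mE2 mO2 := by
  simp [pvDfsALoop, h, h2, hr]

lemma pvDfsALoop_nil (adj : List (List Int)) (f : Nat) (u : Int) (vis : List Bool)
    (mE mO : List Int) : pvDfsALoop adj f u [] vis mE mO = (false, vis, mE, mO) := by
  simp [pvDfsALoop]

lemma pvDfsA_zero (adj : List (List Int)) (u : Int) (vis : List Bool) (mE mO : List Int) :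
    pvDfsA adj 0 u vis mE mO = (false, vis, mE, mO) := by
  simp [pvDfsA]

lemma pvDfsA_succ (adj : List (List Int)) (f : Nat) (u : Int) (vis : List Bool)
    (mE mO : List Int) :
    pvDfsA adj (f + 1) u vis mE mO
      = pvDfsALoop adj f u (PySem.List.pyGetD adj u []) vis mE mO := by
  simp [pvDfsA]

-- unvisited-evens measure
lemma pvUnvis_set (numbers : List Int) (vis : List Bool) {v : Int}
    (hvE : v ∈ pvEvenA numbers) (hlv : vis.length = numbers.length)
    (hunv : PySem.List.pyGetD vis v false = false) :
    pvUnvis numbers (PySem.List.pySetD vis v true) + 1 = pvUnvis numbers vis := by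
  have hvb := pvEven_bounds numbers hvE
  have h := pvCountP_update (pvEven_nodup numbers) hvE
    (fun t => !PySem.List.pyGetD vis t false)
    (fun t => !PySem.List.pyGetD (PySem.List.pySetD vis v true) t false)
    (fun t ht htv => by
      show (!PySem.List.pyGetD vis t false)
        = (!PySem.List.pyGetD (PySem.List.pySetD vis v true) t false)
      rw [pvGetD_setD_ne _ _ _ _ _ hvb.1 (pvEven_bounds numbers ht).1 (fun e => htv e.symm)])
  unfold pvUnvis
  have hnew : PySem.List.pyGetD (PySem.List.pySetD vis v true) v false = true :=
    pvGetD_setD_self vis v true false hvb.1 (by rw [hlv]; exact hvb.2)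
  simpa [hunv, hnew] using h

lemma pvUnvis_mono (numbers : List Int) (vis vis' : List Bool)
    (h : ∀ t ∈ pvEvenA numbers, PySem.List.pyGetD vis t false = true →
      PySem.List.pyGetD vis' t false = true) :
    pvUnvis numbers vis' ≤ pvUnvis numbers vis := by
  unfold pvUnvis
  apply List.countP_mono_left
  intro t ht hb
  by_cases hc : PySem.List.pyGetD vis t false = true
  · rw [h t ht hc] at hb
    cases hb
  · simp only [Bool.not_eq_true] at hc
    simp [hc]

lemma pvGA_set_self (mE : List Int) {v u : Int} (h0 : 0 ≤ v) (hlt : v.toNat < mE.length)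
    (hu : 0 ≤ u) : pvGA (PySem.List.pySetD mE v u) v = some u := by
  unfold pvGA
  rw [pvGetD_setD_self _ _ _ _ h0 hlt]
  have : (u == (-1 : Int)) = false := by
    simp only [beq_eq_false_iff_ne, ne_eq]
    omega
  rw [this]
  simp

lemma pvGA_set_ne (mE : List Int) {v t : Int} (u : Int) (h0 : 0 ≤ v) (ht : 0 ≤ t)
    (hne : t ≠ v) : pvGA (PySem.List.pySetD mE v u) t = pvGA mE t := by
  unfold pvGA
  rw [pvGetD_setD_ne _ _ _ _ _ h0 ht (fun e => hne e.symm)]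

lemma pvGA_matched (mE : List Int) {v : Int}
    (h : (PySem.List.pyGetD mE v (-1) == -1) = false) :
    pvGA mE v = some (PySem.List.pyGetD mE v (-1)) := by
  unfold pvGA
  rw [h]
  simp

lemma pvGA_free (mE : List Int) {v : Int}
    (h : (PySem.List.pyGetD mE v (-1) == -1) = true) : pvGA mE v = none := by
  unfold pvGA
  rw [h]
  simp

lemma pvCnt_set (numbers : List Int) (mE : List Int) {v u : Int} (hvE : v ∈ pvEvenA numbers)
    (hlE : mE.length = numbers.length) (hu : 0 ≤ u) (x : Int) :
    pvCnt (pvEvenA numbers) (pvGA (PySem.List.pySetD mE v u)) x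
      + (if pvGA mE v = some x then 1 else 0)
    = pvCnt (pvEvenA numbers) (pvGA mE) x + (if x = u then 1 else 0) := by
  have hvb := pvEven_bounds numbers hvE
  have h := pvCnt_update (pvEven_nodup numbers) hvE (pvGA mE)
    (pvGA (PySem.List.pySetD mE v u))
    (fun t ht htv =>
      (pvGA_set_ne mE u hvb.1 (pvEven_bounds numbers ht).1 htv).symm) x
  rw [pvGA_set_self mE hvb.1 (by rw [hlE]; exact hvb.2) hu] at h
  have he : (if (some u : Option Int) = some x then (1:Nat) else 0)
      = if x = u then 1 else 0 := by
    by_cases hx : x = u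
    · simp [hx]
    · simp only [hx, if_false]
      rw [if_neg]
      intro e
      exact hx (Option.some_inj.1 e).symm
  rw [he] at h
  exact h

lemma pvALoop (numbers primeSet : List Int) (f : Nat)
    (hdfs : ∀ (u' : Int) (vis : List Bool) (mE mO : List Int),
      u' ∈ pvOddA numbers →
      pvValid numbers primeSet (pvGA mE) →
      mE.length = numbers.length → vis.length = numbers.length →
      pvAPostCore numbers primeSet u' vis mE mO
        (pvDfsA (pvAdjA numbers primeSet) f u' vis mE mO) ∧
      ((pvDfsA (pvAdjA numbers primeSet) f u' vis mE mO).1 = false →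
        pvUnvis numbers vis < f →
        (∀ v ∈ pvEvenA numbers, pvPrimePair numbers primeSet u' v = true →
          PySem.List.pyGetD (pvDfsA (pvAdjA numbers primeSet) f u' vis mE mO).2.1 v false = true) ∧
        pvAClosure numbers primeSet vis mE
          (pvDfsA (pvAdjA numbers primeSet) f u' vis mE mO))) :
    ∀ (ns : List Int) (u : Int) (vis : List Bool) (mE mO : List Int),
      u ∈ pvOddA numbers →
      pvValid numbers primeSet (pvGA mE) →
      mE.length = numbers.length → vis.length = numbers.length →
      (∀ v ∈ ns, v ∈ pvEvenA numbers ∧ pvPrimePair numbers primeSet u v = true) →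
      pvAPostCore numbers primeSet u vis mE mO
        (pvDfsALoop (pvAdjA numbers primeSet) f u ns vis mE mO) ∧
      ((pvDfsALoop (pvAdjA numbers primeSet) f u ns vis mE mO).1 = false →
        pvUnvis numbers vis ≤ f →
        (∀ v ∈ ns, PySem.List.pyGetD
          (pvDfsALoop (pvAdjA numbers primeSet) f u ns vis mE mO).2.1 v false = true) ∧
        pvAClosure numbers primeSet vis mE
          (pvDfsALoop (pvAdjA numbers primeSet) f u ns vis mE mO)) := by
  intro ns
  induction ns with
  | nil =>
    intro u vis mE mO hu hval hlE hlv hns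
    rw [pvDfsALoop_nil]
    constructor
    · constructor
      · intro h
        simp at h
      · intro _
        exact ⟨rfl, rfl, rfl, fun v hv h => h⟩
    · intro _ _
      refine ⟨fun v hv => absurd hv (by simp), fun v hv h => Or.inl h⟩
  | cons v rest ih =>
    intro u vis mE mO hu hval hlE hlv hns
    obtain ⟨hvE, hedge⟩ := hns v (List.mem_cons_self ..)
    have hvb := pvEven_bounds numbers hvE
    have hub := pvOdd_bounds numbers hu
    have hrest : ∀ x ∈ rest, x ∈ pvEvenA numbers ∧ pvPrimePair numbers primeSet u x = true :=
      fun x hx => hns x (List.mem_cons_of_mem _ hx)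
    by_cases hvis : PySem.List.pyGetD vis v false = true
    · -- already visited: the loop skips v
      rw [pvDfsALoop_visited _ _ _ _ _ _ _ _ hvis]
      have hres := ih u vis mE mO hu hval hlE hlv hrest
      refine ⟨hres.1, ?_⟩
      intro hf hfu
      refine ⟨?_, (hres.2 hf hfu).2⟩
      intro v' hv'
      rcases List.mem_cons.1 hv' with rfl | h
      · exact (hres.1.2 hf).2.2.2 v' hvE hvis
      · exact (hres.2 hf hfu).1 v' h
    · have hvis0 : PySem.List.pyGetD vis v false = false := by
        simpa using hvis
      have hvisSelf : PySem.List.pyGetD (PySem.List.pySetD vis v true) v false = true :=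
        pvGetD_setD_self vis v true false hvb.1 (by rw [hlv]; exact hvb.2)
      have hvisNe : ∀ t ∈ pvEvenA numbers, t ≠ v →
          PySem.List.pyGetD (PySem.List.pySetD vis v true) t false
            = PySem.List.pyGetD vis t false := fun t ht htv =>
        pvGetD_setD_ne _ _ _ _ _ hvb.1 (pvEven_bounds numbers ht).1 (fun e => htv e.symm)
      by_cases hfree : (PySem.List.pyGetD mE v (-1) == -1) = true
      · -- v is free: immediate success
        rw [pvDfsALoop_free _ _ _ _ _ _ _ _ hvis0 hfree]
        constructor
        · constructor
          · intro _
            refine ⟨PySem.List.length_pySetD .., ?_, ?_, ?_⟩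
            · intro v' hv' hvv'
              have hne : v ≠ v' := by
                intro e
                rw [← e] at hvv'
                rw [hvis0] at hvv'
                cases hvv'
              exact pvGetD_setD_ne _ _ _ _ _ hvb.1 (pvEven_bounds numbers hv').1 hne
            · intro v' hv' w hw
              by_cases hvv : v' = v
              · subst hvv
                rw [pvGA_set_self mE hvb.1 (by rw [hlE]; exact hvb.2) hub.1] at hw
                cases hw
                exact ⟨hu, hedge⟩
              · rw [pvGA_set_ne mE u hvb.1 (pvEven_bounds numbers hv').1 hvv] at hw
                exact hval v' hv' w hw
            · intro x
              have := pvCnt_set numbers mE hvE hlE hub.1 x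
              rw [pvGA_free mE hfree] at this
              simpa using this
          · intro h
            cases h
        · intro h
          cases h
      · -- v is matched: recurse on its partner
        have hfree' : (PySem.List.pyGetD mE v (-1) == -1) = false := by
          simpa using hfree
        have hgav : pvGA mE v = some (PySem.List.pyGetD mE v (-1)) := pvGA_matched mE hfree'
        obtain ⟨hw0O, hw0edge⟩ := hval v hvE _ hgav
        have hlv' : (PySem.List.pySetD vis v true).length = numbers.length := by
          rw [PySem.List.length_pySetD]
          exact hlv
        have hd := hdfs (PySem.List.pyGetD mE v (-1)) (PySem.List.pySetD vis v true) mE mO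
          hw0O hval hlE hlv'
        rcases hr : pvDfsA (pvAdjA numbers primeSet) f (PySem.List.pyGetD mE v (-1))
            (PySem.List.pySetD vis v true) mE mO with ⟨b, vis2, mE2, mO2⟩
        rw [hr] at hd
        cases b with
        | true =>
          rw [pvDfsALoop_matched_true (h := hvis0) (h2 := hfree') (hr := hr) (rest := rest) (u := u)]
          obtain ⟨hT1, hT2, hT3, hT4⟩ := hd.1.1 rfl
          dsimp only at hT1 hT2 hT3 hT4
          have hmE2v : PySem.List.pyGetD mE2 v (-1) = PySem.List.pyGetD mE v (-1) :=
            hT2 v hvE hvisSelf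
          have hlE2 : mE2.length = numbers.length := by
            rw [hT1]; exact hlE
          constructor
          · constructor
            · intro _
              refine ⟨by rw [PySem.List.length_pySetD, hT1], ?_, ?_, ?_⟩
              · intro v' hv' hvv'
                have hne : v' ≠ v := by
                  intro e
                  rw [e, hvis0] at hvv'
                  cases hvv'
                have hstep : PySem.List.pyGetD (PySem.List.pySetD vis v true) v' false = true := by
                  rw [hvisNe v' hv' hne]
                  exact hvv'
                rw [pvGetD_setD_ne _ _ _ _ _ hvb.1 (pvEven_bounds numbers hv').1
                  (fun e => hne e.symm)]
                exact hT2 v' hv' hstep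
              · intro v' hv' w hw
                by_cases hvv : v' = v
                · subst hvv
                  rw [pvGA_set_self mE2 hvb.1 (by rw [hlE2]; exact hvb.2) hub.1] at hw
                  cases hw
                  exact ⟨hu, hedge⟩
                · rw [pvGA_set_ne mE2 u hvb.1 (pvEven_bounds numbers hv').1 hvv] at hw
                  exact hT3 v' hv' w hw
              · intro x
                show pvCnt (pvEvenA numbers) (pvGA (PySem.List.pySetD mE2 v u)) x
                  = pvCnt (pvEvenA numbers) (pvGA mE) x + (if x = u then 1 else 0)
                have hset := pvCnt_set numbers mE2 hvE hlE2 hub.1 x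
                have hga2 : pvGA mE2 v = some (PySem.List.pyGetD mE v (-1)) := by
                  rw [pvGA_matched mE2 (by rw [hmE2v]; exact hfree'), hmE2v]
                rw [hga2] at hset
                have hT4x := hT4 x
                by_cases hxw : x = PySem.List.pyGetD mE v (-1)
                · rw [if_pos hxw] at hT4x
                  rw [if_pos (by rw [hxw])] at hset
                  omega
                · rw [if_neg hxw] at hT4x
                  rw [if_neg (fun e => hxw (Option.some_inj.1 e).symm)] at hset
                  omega
            · intro h
              cases h
          · intro h
            cases h
        | false =>
          rw [pvDfsALoop_matched_false (h := hvis0) (h2 := hfree') (hr := hr) (rest := rest) (u := u)]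
          obtain ⟨hFE, hFO, hFlen, hFmono⟩ := hd.1.2 rfl
          dsimp only at hFE hFO hFlen hFmono
          rw [hFE, hFO]
          have hlv2 : vis2.length = numbers.length := by
            rw [hFlen]
            exact hlv'
          have hrec := ih u vis2 mE mO hu hval hlE hlv2 hrest
          have hmono2 : ∀ t ∈ pvEvenA numbers, PySem.List.pyGetD vis t false = true →
              PySem.List.pyGetD vis2 t false = true := by
            intro t ht hc
            have hne : t ≠ v := by
              intro e
              rw [e, hvis0] at hc
              cases hc
            apply hFmono t ht
            rw [hvisNe t ht hne]
            exact hc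
          constructor
          · constructor
            · intro h
              obtain ⟨hT1, hT2, hT3, hT4⟩ := hrec.1.1 h
              exact ⟨hT1, fun v' hv' hc => hT2 v' hv' (hmono2 v' hv' hc), hT3, hT4⟩
            · intro h
              obtain ⟨hE1, hE2, hE3, hE4⟩ := hrec.1.2 h
              exact ⟨hE1, hE2, by rw [hE3, hFlen, PySem.List.length_pySetD],
                fun v' hv' hc => hE4 v' hv' (hmono2 v' hv' hc)⟩
          · intro h hfu
            have hfu' : pvUnvis numbers (PySem.List.pySetD vis v true) < f := by
              have := pvUnvis_set numbers vis hvE hlv hvis0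
              omega
            obtain ⟨hN, hC⟩ := hd.2 rfl hfu'
            dsimp only at hN
            unfold pvAClosure at hC
            dsimp only at hC
            have hfu2 : pvUnvis numbers vis2 ≤ f := by
              have := pvUnvis_mono numbers (PySem.List.pySetD vis v true) vis2 hFmono
              have := pvUnvis_set numbers vis hvE hlv hvis0
              omega
            have hrec2 := hrec.2 h hfu2
            have hrecmono := (hrec.1.2 h).2.2.2
            constructor
            · intro v' hv'
              rcases List.mem_cons.1 hv' with rfl | hmem
              · exact hrecmono v' hvE (hFmono v' hvE hvisSelf)
              · exact hrec2.1 v' hmem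
            · -- closure
              intro v' hv' hvisited
              rcases hrec2.2 v' hv' hvisited with hin2 | ⟨w, hwga, hwcl⟩
              · -- v' was visited before the rest of the loop ran
                rcases hC v' hv' hin2 with hin1 | ⟨w, hwga, hwcl⟩
                · -- visited in vis or v' = v
                  by_cases hvv : v' = v
                  · subst hvv
                    refine Or.inr ⟨PySem.List.pyGetD mE v' (-1), hgav, ?_⟩
                    intro t ht hedge'
                    exact hrecmono t ht (hN t ht hedge')
                  · left
                    rw [← hvisNe v' hv' hvv]
                    exact hin1
                · exact Or.inr ⟨w, hwga, fun t ht he => hrecmono t ht (hwcl t ht he)⟩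
              · exact Or.inr ⟨w, hwga, hwcl⟩

lemma pvADfs (numbers primeSet : List Int) :
    ∀ (fuel : Nat) (u : Int) (vis : List Bool) (mE mO : List Int),
      u ∈ pvOddA numbers →
      pvValid numbers primeSet (pvGA mE) →
      mE.length = numbers.length → vis.length = numbers.length →
      pvAPostCore numbers primeSet u vis mE mO
        (pvDfsA (pvAdjA numbers primeSet) fuel u vis mE mO) ∧
      ((pvDfsA (pvAdjA numbers primeSet) fuel u vis mE mO).1 = false →
        pvUnvis numbers vis < fuel →
        (∀ v ∈ pvEvenA numbers, pvPrimePair numbers primeSet u v = true →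
          PySem.List.pyGetD (pvDfsA (pvAdjA numbers primeSet) fuel u vis mE mO).2.1 v false = true) ∧
        pvAClosure numbers primeSet vis mE
          (pvDfsA (pvAdjA numbers primeSet) fuel u vis mE mO)) := by
  intro fuel
  induction fuel with
  | zero =>
    intro u vis mE mO hu hval hlE hlv
    rw [pvDfsA_zero]
    constructor
    · constructor
      · intro h
        simp at h
      · intro _
        exact ⟨rfl, rfl, rfl, fun v hv h => h⟩
    · intro _ hcon
      omega
  | succ f ihf =>
    intro u vis mE mO hu hval hlE hlv
    rw [pvDfsA_succ]
    have hns : ∀ v ∈ PySem.List.pyGetD (pvAdjA numbers primeSet) u [],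
        v ∈ pvEvenA numbers ∧ pvPrimePair numbers primeSet u v = true := by
      intro v hv
      rw [pvAdjA_spec numbers primeSet u hu] at hv
      have := List.mem_filter.1 hv
      exact ⟨this.1, this.2⟩
    have hloop := pvALoop numbers primeSet f
      (fun u' vis' mE' mO' a b c d => ihf u' vis' mE' mO' a b c d)
      (PySem.List.pyGetD (pvAdjA numbers primeSet) u []) u vis mE mO hu hval hlE hlv hns
    refine ⟨hloop.1, ?_⟩
    intro h hfu
    have hfu' : pvUnvis numbers vis ≤ f := by omega
    obtain ⟨hN, hC⟩ := hloop.2 h hfu'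
    refine ⟨?_, hC⟩
    intro v hv he
    apply hN
    rw [pvAdjA_spec numbers primeSet u hu]
    exact List.mem_filter.2 ⟨hv, he⟩

-- the A-side outer loop --------------------------------------------------------

lemma pvOuterA_cons_true (adj : List (List Int)) (nn : Nat) (u : Int) (us : List Int)
    (mE mO : List Int) (vis2 : List Bool) (mE2 mO2 : List Int)
    (hr : pvDfsA adj (nn + 1) u (List.replicate nn false) mE mO = (true, vis2, mE2, mO2)) :
    pvOuterA adj nn mE mO (u :: us) = pvOuterA adj nn mE2 mO2 us := by
  simp [pvOuterA, hr]

lemma pvOuterA_cons_false (adj : List (List Int)) (nn : Nat) (u : Int) (us : List Int)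
    (mE mO : List Int) (vis2 : List Bool) (mE2 mO2 : List Int)
    (hr : pvDfsA adj (nn + 1) u (List.replicate nn false) mE mO = (false, vis2, mE2, mO2)) :
    pvOuterA adj nn mE mO (u :: us) = false := by
  simp [pvOuterA, hr]

lemma pvUnvis_replicate (numbers : List Int) (k : Nat) :
    pvUnvis numbers (List.replicate k false) = (pvEvenA numbers).length := by
  unfold pvUnvis
  rw [List.countP_eq_length.2]
  intro v _
  rw [pvGetD_replicate_const]
  rfl

lemma pvAOuter (numbers primeSet : List Int) :
    ∀ (us P : List Int) (mE mO : List Int),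
      pvOddA numbers = P ++ us →
      pvValid numbers primeSet (pvGA mE) →
      pvCounts numbers (pvGA mE) P →
      mE.length = numbers.length →
      (pvOuterA (pvAdjA numbers primeSet) numbers.length mE mO us = true →
        pvCov numbers primeSet) ∧
      (pvOuterA (pvAdjA numbers primeSet) numbers.length mE mO us = false →
        ¬ pvCov numbers primeSet) := by
  intro us
  induction us with
  | nil =>
    intro P mE mO hsplit hval hcnt hlE
    constructor
    · intro _
      apply pvCov_of_full numbers primeSet (pvGA mE) hval
      have hP : P = pvOddA numbers := by rw [hsplit, List.append_nil]
      exact hP ▸ hcnt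
    · intro h
      cases h
  | cons u us ih =>
    intro P mE mO hsplit hval hcnt hlE
    have hu : u ∈ pvOddA numbers := by
      rw [hsplit]
      exact List.mem_append.2 (Or.inr (List.mem_cons_self ..))
    have hnd := pvOdd_nodup numbers
    rw [hsplit] at hnd
    have huP : u ∉ P := fun hup =>
      (List.disjoint_of_nodup_append hnd) hup (List.mem_cons_self ..)
    have hd := pvADfs numbers primeSet (numbers.length + 1) u
      (List.replicate numbers.length false) mE mO hu hval hlE (by simp)
    rcases hr : pvDfsA (pvAdjA numbers primeSet) (numbers.length + 1) u
        (List.replicate numbers.length false) mE mO with ⟨b, vis2, mE2, mO2⟩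
    rw [hr] at hd
    cases b with
    | true =>
      rw [pvOuterA_cons_true _ _ _ _ _ _ _ _ _ hr]
      obtain ⟨hT1, hT2, hT3, hT4⟩ := hd.1.1 rfl
      dsimp only at hT1 hT2 hT3 hT4
      have hcnt' : pvCounts numbers (pvGA mE2) (P ++ [u]) := by
        intro x hx
        have h4 := hT4 x
        have hc := hcnt x hx
        by_cases hxu : x = u
        · subst hxu
          rw [if_pos (List.mem_append.2 (Or.inr (List.mem_singleton.2 rfl)))]
          rw [if_neg huP] at hc
          rw [if_pos rfl] at h4
          omega
        · have hmm : (x ∈ P ++ [u]) ↔ (x ∈ P) := by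
            rw [List.mem_append, List.mem_singleton]
            exact ⟨fun h => h.resolve_right hxu, Or.inl⟩
          rw [if_neg hxu] at h4
          by_cases hxP : x ∈ P
          · rw [if_pos (hmm.2 hxP)]
            rw [if_pos hxP] at hc
            omega
          · rw [if_neg (fun h => hxP (hmm.1 h))]
            rw [if_neg hxP] at hc
            omega
      exact ih (P ++ [u]) mE2 mO2 (by rw [hsplit, List.append_assoc]; rfl) hT3 hcnt'
        (by rw [hT1]; exact hlE)
    | false =>
      rw [pvOuterA_cons_false _ _ _ _ _ _ _ _ _ hr]
      refine ⟨fun h => absurd h (by simp), fun _ => ?_⟩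
      have hfuel : pvUnvis numbers (List.replicate numbers.length false)
          < numbers.length + 1 := by
        rw [pvUnvis_replicate]
        have := pvEven_len_le numbers
        omega
      obtain ⟨hN, hC⟩ := hd.2 rfl hfuel
      dsimp only at hN
      unfold pvAClosure at hC
      dsimp only at hC
      apply pvNoCov_of_state numbers primeSet (pvGA mE) P u
        ((pvEvenA numbers).filter (fun v => PySem.List.pyGetD vis2 v false))
        hval hcnt hu huP ((pvEven_nodup numbers).filter _)
        (fun v hv => (List.mem_filter.1 hv).1)
      · intro v hv he
        exact List.mem_filter.2 ⟨hv, hN v hv he⟩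
      · intro v hv
        obtain ⟨hvE, hvvis⟩ := List.mem_filter.1 hv
        rcases hC v hvE hvvis with hin | ⟨w, hw, hcl⟩
        · rw [pvGetD_replicate_const] at hin
          cases hin
        · exact ⟨w, hw, fun v' hv' he' => List.mem_filter.2 ⟨hv', hcl v' hv' he'⟩⟩

-- the B-side: parent/queue invariants ------------------------------------------

def pvPaInv (numbers primeSet : List Int) (pairV : PySem.Dict Int Int) (s : Int)
    (parent : PySem.Dict Int (Int × Option Int)) : Prop :=
  ∀ p ∈ parent.items, p.1 ∈ pvEvenA numbers ∧ p.2.1 ∈ pvOddA numbers ∧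
    pvPrimePair numbers primeSet p.2.1 p.1 = true ∧
    (match p.2.2 with
     | none => p.2.1 = s
     | some v0 => v0 ∈ parent.keys ∧ parent.keys.idxOf v0 < parent.keys.idxOf p.1 ∧
         pairV.get? v0 = some p.2.1)

def pvQInv (pairV : PySem.Dict Int Int) (s : Int)
    (parent : PySem.Dict Int (Int × Option Int)) (q : List (Int × Option Int))
    (numbers : List Int) : Prop :=
  ∀ p ∈ q, p.1 ∈ pvOddA numbers ∧
    (match p.2 with
     | none => p.1 = s
     | some v0 => v0 ∈ parent.keys ∧ pairV.get? v0 = some p.1)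

def pvCInvB (numbers primeSet : List Int) (pairV : PySem.Dict Int Int)
    (parent : PySem.Dict Int (Int × Option Int)) (q : List (Int × Option Int)) : Prop :=
  ∀ v ∈ parent.keys, ∃ w, pairV.get? v = some w ∧
    (w ∈ q.map Prod.fst ∨ ∀ v' ∈ pvEvenA numbers,
      pvPrimePair numbers primeSet w v' = true → v' ∈ parent.keys)

-- unfolding equations for the B-side scan / BFS / flip
lemma pvScanB_nil (numbers primeSet : List Int) (pairV : PySem.Dict Int Int) (u : Int)
    (pu : Option Int) (parent : PySem.Dict Int (Int × Option Int))
    (apps : List (Int × Option Int)) :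
    pvScanB numbers primeSet pairV u pu [] parent apps = (parent, apps, none) := rfl

lemma pvScanB_skip (numbers primeSet : List Int) (pairV : PySem.Dict Int Int) (u v : Int)
    (pu : Option Int) (vs : List Int) (parent : PySem.Dict Int (Int × Option Int))
    (apps : List (Int × Option Int))
    (h : (!(parent.contains v) && pvPrimePair numbers primeSet u v) = false) :
    pvScanB numbers primeSet pairV u pu (v :: vs) parent apps
      = pvScanB numbers primeSet pairV u pu vs parent apps := by
  simp [pvScanB, h]

lemma pvScanB_found (numbers primeSet : List Int) (pairV : PySem.Dict Int Int) (u v : Int)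
    (pu : Option Int) (vs : List Int) (parent : PySem.Dict Int (Int × Option Int))
    (apps : List (Int × Option Int))
    (h : (!(parent.contains v) && pvPrimePair numbers primeSet u v) = true)
    (hg : pairV.get? v = none) :
    pvScanB numbers primeSet pairV u pu (v :: vs) parent apps
      = (parent.insert v (u, pu), apps, some v) := by
  simp [pvScanB, h, hg]

lemma pvScanB_matched (numbers primeSet : List Int) (pairV : PySem.Dict Int Int) (u v w : Int)
    (pu : Option Int) (vs : List Int) (parent : PySem.Dict Int (Int × Option Int))
    (apps : List (Int × Option Int))
    (h : (!(parent.contains v) && pvPrimePair numbers primeSet u v) = true)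
    (hg : pairV.get? v = some w) :
    pvScanB numbers primeSet pairV u pu (v :: vs) parent apps
      = pvScanB numbers primeSet pairV u pu vs (parent.insert v (u, pu))
          (apps ++ [(w, some v)]) := by
  simp [pvScanB, h, hg]

lemma pvBfsB_cons_some (numbers primeSet : List Int) (pairV : PySem.Dict Int Int)
    (f : Nat) (u g : Int) (pu : Option Int) (rest : List (Int × Option Int))
    (parent parent' : PySem.Dict Int (Int × Option Int)) (apps' : List (Int × Option Int))
    (hr : pvScanB numbers primeSet pairV u pu (pvEvenA numbers) parent []
      = (parent', apps', some g)) :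
    pvBfsB numbers primeSet (pvEvenA numbers) pairV (f + 1) ((u, pu) :: rest) parent
      = (parent', some g) := by
  simp [pvBfsB, hr]

lemma pvBfsB_cons_none (numbers primeSet : List Int) (pairV : PySem.Dict Int Int)
    (f : Nat) (u : Int) (pu : Option Int) (rest : List (Int × Option Int))
    (parent parent' : PySem.Dict Int (Int × Option Int)) (apps' : List (Int × Option Int))
    (hr : pvScanB numbers primeSet pairV u pu (pvEvenA numbers) parent []
      = (parent', apps', none)) :
    pvBfsB numbers primeSet (pvEvenA numbers) pairV (f + 1) ((u, pu) :: rest) parent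
      = pvBfsB numbers primeSet (pvEvenA numbers) pairV f (rest ++ apps') parent' := by
  simp [pvBfsB, hr]

lemma pvFlipB_none (parent : PySem.Dict Int (Int × Option Int)) (f : Nat)
    (pairV : PySem.Dict Int Int) : pvFlipB parent f none pairV = pairV := by
  cases f <;> simp [pvFlipB]

lemma pvFlipB_step (parent : PySem.Dict Int (Int × Option Int)) (f : Nat) (v u : Int)
    (pv : Option Int) (pairV : PySem.Dict Int Int) (h : parent.get? v = some (u, pv)) :
    pvFlipB parent (f + 1) (some v) pairV = pvFlipB parent f pv (pairV.insert v u) := by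
  simp [pvFlipB, h]

-- a fresh insert preserves the parent invariant
lemma pvPaInv_insert (numbers primeSet : List Int) (pairV : PySem.Dict Int Int) (s : Int)
    (parent : PySem.Dict Int (Int × Option Int)) (v u : Int) (pu : Option Int)
    (hfresh : parent.contains v = false)
    (hvE : v ∈ pvEvenA numbers) (huO : u ∈ pvOddA numbers)
    (hedge : pvPrimePair numbers primeSet u v = true)
    (hpu1 : pu = none → u = s)
    (hpu2 : ∀ v0, pu = some v0 → v0 ∈ parent.keys ∧ pairV.get? v0 = some u)
    (hPa : pvPaInv numbers primeSet pairV s parent) :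
    pvPaInv numbers primeSet pairV s (parent.insert v (u, pu)) := by
  have hkeys := PySem.Dict.keys_insert_of_not_contains parent (u, pu) hfresh
  have hvnot : v ∉ parent.keys := fun hmem => by
    rw [(PySem.Dict.contains_iff_mem_keys parent v).2 hmem] at hfresh
    cases hfresh
  intro p hp
  rw [PySem.Dict.items_insert_of_not_contains parent (u, pu) hfresh] at hp
  rcases List.mem_append.1 hp with hold | hnew
  · obtain ⟨h1, h2, h3, h4⟩ := hPa p hold
    refine ⟨h1, h2, h3, ?_⟩
    rcases hpv : p.2.2 with _ | v0
    · rw [hpv] at h4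
      exact h4
    · rw [hpv] at h4
      obtain ⟨hm, hidx, hget⟩ := h4
      have hp1mem : p.1 ∈ parent.keys := PySem.Dict.mem_keys_of_mem_items parent hold
      refine ⟨by rw [hkeys]; exact List.mem_append_left _ hm, ?_, hget⟩
      rw [hkeys, List.idxOf_append_of_mem hm, List.idxOf_append_of_mem hp1mem]
      exact hidx
  · rw [List.mem_singleton] at hnew
    subst hnew
    refine ⟨hvE, huO, hedge, ?_⟩
    rcases hpv : pu with _ | v0
    · exact hpu1 hpv
    · subst hpv
      obtain ⟨hm, hget⟩ := hpu2 v0 rfl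
      refine ⟨by rw [hkeys]; exact List.mem_append_left _ hm, ?_, hget⟩
      have hlt := List.idxOf_lt_length_of_mem hm
      rw [hkeys, List.idxOf_append_of_mem hm, List.idxOf_append, if_neg hvnot]
      simp only [List.idxOf_cons_self]
      omega

-- the inner scan of one dequeued odd vertex
lemma pvBScan (numbers primeSet : List Int) (pairV : PySem.Dict Int Int) (s u : Int)
    (pu : Option Int) (hu : u ∈ pvOddA numbers) :
    ∀ (vs : List Int) (parent : PySem.Dict Int (Int × Option Int))
      (apps : List (Int × Option Int)),
      (∀ v ∈ vs, v ∈ pvEvenA numbers) →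
      (pu = none → u = s) →
      (∀ v0, pu = some v0 → v0 ∈ parent.keys ∧ pairV.get? v0 = some u) →
      parent.keys.Nodup →
      (∀ v ∈ parent.keys, v ∈ pvEvenA numbers) →
      pvPaInv numbers primeSet pairV s parent →
      (∃ new, (pvScanB numbers primeSet pairV u pu vs parent apps).1.keys
        = parent.keys ++ new) ∧
      (pvScanB numbers primeSet pairV u pu vs parent apps).1.keys.Nodup ∧
      (∀ v ∈ (pvScanB numbers primeSet pairV u pu vs parent apps).1.keys,
        v ∈ pvEvenA numbers) ∧
      pvPaInv numbers primeSet pairV s (pvScanB numbers primeSet pairV u pu vs parent apps).1 ∧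
      (∃ tail, (pvScanB numbers primeSet pairV u pu vs parent apps).2.1 = apps ++ tail) ∧
      (∀ g, (pvScanB numbers primeSet pairV u pu vs parent apps).2.2 = some g →
        g ∈ (pvScanB numbers primeSet pairV u pu vs parent apps).1.keys ∧
        pairV.get? g = none) ∧
      ((pvScanB numbers primeSet pairV u pu vs parent apps).2.2 = none →
        (∀ v ∈ vs, pvPrimePair numbers primeSet u v = true →
          v ∈ (pvScanB numbers primeSet pairV u pu vs parent apps).1.keys) ∧
        (∀ p ∈ (pvScanB numbers primeSet pairV u pu vs parent apps).2.1, p ∈ apps ∨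
          ∃ v, p.2 = some v ∧ v ∈ (pvScanB numbers primeSet pairV u pu vs parent apps).1.keys ∧
            pairV.get? v = some p.1) ∧
        (∀ v ∈ (pvScanB numbers primeSet pairV u pu vs parent apps).1.keys,
          v ∈ parent.keys ∨ ∃ w, pairV.get? v = some w ∧
            (w, some v) ∈ (pvScanB numbers primeSet pairV u pu vs parent apps).2.1) ∧
        ((pvScanB numbers primeSet pairV u pu vs parent apps).2.1.length
            + (pvEvenA numbers).countP
                (fun t => !((pvScanB numbers primeSet pairV u pu vs parent apps).1.contains t))
          = apps.length + (pvEvenA numbers).countP (fun t => !(parent.contains t)))) := by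
  intro vs
  induction vs with
  | nil =>
    intro parent apps hvs hpu1 hpu2 hnd hkE hPa
    rw [pvScanB_nil]
    refine ⟨⟨[], by simp⟩, hnd, hkE, hPa, ⟨[], by simp⟩, ?_, ?_⟩
    · intro g hg
      cases hg
    · intro _
      exact ⟨fun v hv => absurd hv (by simp), fun p hp => Or.inl hp,
        fun v hv => Or.inl hv, rfl⟩
  | cons v vs ih =>
    intro parent apps hvs hpu1 hpu2 hnd hkE hPa
    have hvE : v ∈ pvEvenA numbers := hvs v (List.mem_cons_self ..)
    have hrest : ∀ x ∈ vs, x ∈ pvEvenA numbers := fun x hx => hvs x (List.mem_cons_of_mem _ hx)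
    by_cases hguard : (!(parent.contains v) && pvPrimePair numbers primeSet u v) = true
    · have hfresh : parent.contains v = false := by
        rcases Bool.and_eq_true_iff.1 hguard with ⟨h1, _⟩
        simpa using h1
      have hedge : pvPrimePair numbers primeSet u v = true :=
        (Bool.and_eq_true_iff.1 hguard).2
      have hkeys := PySem.Dict.keys_insert_of_not_contains parent (u, pu) hfresh
      have hvnot : v ∉ parent.keys := fun hmem => by
        rw [(PySem.Dict.contains_iff_mem_keys parent v).2 hmem] at hfresh
        cases hfresh
      have hnd' : (parent.insert v (u, pu)).keys.Nodup :=
        PySem.Dict.nodup_keys_insert _ _ _ hnd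
      have hkE' : ∀ t ∈ (parent.insert v (u, pu)).keys, t ∈ pvEvenA numbers := by
        intro t ht
        rw [hkeys] at ht
        rcases List.mem_append.1 ht with h | h
        · exact hkE t h
        · rw [List.mem_singleton.1 h]
          exact hvE
      have hPa' := pvPaInv_insert numbers primeSet pairV s parent v u pu hfresh hvE hu
        hedge hpu1 hpu2 hPa
      have hpu2' : ∀ v0, pu = some v0 →
          v0 ∈ (parent.insert v (u, pu)).keys ∧ pairV.get? v0 = some u := by
        intro v0 h0
        obtain ⟨hm, hget⟩ := hpu2 v0 h0
        exact ⟨by rw [hkeys]; exact List.mem_append_left _ hm, hget⟩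
      rcases hpv : pairV.get? v with _ | w
      · -- free even found
        rw [pvScanB_found numbers primeSet pairV u v pu vs parent apps hguard hpv]
        refine ⟨⟨[v], hkeys⟩, hnd', hkE', hPa', ⟨[], by simp⟩, ?_, ?_⟩
        · intro g hg
          cases hg
          exact ⟨by rw [hkeys]; exact List.mem_append_right _ (List.mem_singleton.2 rfl), hpv⟩
        · intro h
          cases h
      · -- matched even: enqueue its partner
        rw [pvScanB_matched numbers primeSet pairV u v w pu vs parent apps hguard hpv]
        have hres := ih (parent.insert v (u, pu)) (apps ++ [(w, some v)]) hrest hpu1 hpu2'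
          hnd' hkE' hPa'
        obtain ⟨⟨new, hnew⟩, hrnd, hrkE, hrPa, ⟨tail, htail⟩, hrsome, hrnone⟩ := hres
        have hvin : v ∈ (pvScanB numbers primeSet pairV u pu vs (parent.insert v (u, pu))
            (apps ++ [(w, some v)])).1.keys := by
          rw [hnew, hkeys]
          exact List.mem_append_left _ (List.mem_append_right _ (List.mem_singleton.2 rfl))
        refine ⟨⟨[v] ++ new, by rw [hnew, hkeys, List.append_assoc]⟩, hrnd, hrkE, hrPa,
          ⟨[(w, some v)] ++ tail, by rw [htail, List.append_assoc]⟩, hrsome, ?_⟩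
        intro hnone
        obtain ⟨hN1, hN2, hN3, hN4⟩ := hrnone hnone
        refine ⟨?_, ?_, ?_, ?_⟩
        · intro t ht hedge'
          rcases List.mem_cons.1 ht with rfl | htvs
          · exact hvin
          · exact hN1 t htvs hedge'
        · intro p hp
          rcases hN2 p hp with hin | hex
          · rcases List.mem_append.1 hin with h | h
            · exact Or.inl h
            · rw [List.mem_singleton.1 h]
              exact Or.inr ⟨v, rfl, hvin, hpv⟩
          · exact Or.inr hex
        · intro t ht
          rcases hN3 t ht with hin | hex
          · rw [hkeys] at hin
            rcases List.mem_append.1 hin with h | h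
            · exact Or.inl h
            · rw [List.mem_singleton.1 h]
              refine Or.inr ⟨w, hpv, ?_⟩
              rw [htail]
              exact List.mem_append_left _ (List.mem_append_right _ (List.mem_singleton.2 rfl))
          · exact Or.inr hex
        · have hcontains : ∀ t ∈ pvEvenA numbers, t ≠ v →
              ((parent.insert v (u, pu)).contains t) = (parent.contains t) := by
            intro t ht htv
            rw [PySem.Dict.contains_insert]
            have : (t == v) = false := by simpa using htv
            rw [this, Bool.false_or]
          have hstep := pvCountP_update (pvEven_nodup numbers) hvE
            (fun t => !(parent.contains t))
            (fun t => !((parent.insert v (u, pu)).contains t))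
            (fun t ht htv => by
              show (!(parent.contains t)) = (!((parent.insert v (u, pu)).contains t))
              rw [hcontains t ht htv])
          have hcv : (parent.insert v (u, pu)).contains v = true := by
            rw [PySem.Dict.contains_insert]
            simp
          simp [hfresh, hcv] at hstep
          rw [List.length_append] at hN4
          simp only [List.length_append, List.length_singleton] at hN4 ⊢
          omega
    · -- the guard is false: skip v
      have hguard' : (!(parent.contains v) && pvPrimePair numbers primeSet u v) = false := by
        simpa using hguard
      rw [pvScanB_skip numbers primeSet pairV u v pu vs parent apps hguard']
      have hres := ih parent apps hrest hpu1 hpu2 hnd hkE hPa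
      obtain ⟨⟨new, hnew⟩, hrnd, hrkE, hrPa, htail, hrsome, hrnone⟩ := hres
      refine ⟨⟨new, hnew⟩, hrnd, hrkE, hrPa, htail, hrsome, ?_⟩
      intro hnone
      obtain ⟨hN1, hN2, hN3, hN4⟩ := hrnone hnone
      refine ⟨?_, hN2, hN3, hN4⟩
      intro t ht hedge'
      rcases List.mem_cons.1 ht with rfl | htvs
      · -- edge holds, so the guard failed because t was already in parent
        have hcont : parent.contains t = true := by
          rcases hb : parent.contains t
          · rw [hb] at hguard'
            simp [hedge'] at hguard'
          · rfl
        have : t ∈ parent.keys := (PySem.Dict.contains_iff_mem_keys parent t).1 hcont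
        rw [hnew]
        exact List.mem_append_left _ this
      · exact hN1 t htvs hedge'

lemma pvBBfs (numbers primeSet : List Int) (pairV : PySem.Dict Int Int) (s : Int)
    (hval : pvValid numbers primeSet (fun t => pairV.get? t)) :
    ∀ (fuel : Nat) (q : List (Int × Option Int)) (parent : PySem.Dict Int (Int × Option Int)),
      parent.keys.Nodup →
      (∀ v ∈ parent.keys, v ∈ pvEvenA numbers) →
      pvPaInv numbers primeSet pairV s parent →
      pvQInv pairV s parent q numbers →
      pvCInvB numbers primeSet pairV parent q →
      q.length + (pvEvenA numbers).countP (fun v => !(parent.contains v)) < fuel →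
      (∀ g, (pvBfsB numbers primeSet (pvEvenA numbers) pairV fuel q parent).2 = some g →
        (pvBfsB numbers primeSet (pvEvenA numbers) pairV fuel q parent).1.keys.Nodup ∧
        pvPaInv numbers primeSet pairV s
          (pvBfsB numbers primeSet (pvEvenA numbers) pairV fuel q parent).1 ∧
        g ∈ (pvBfsB numbers primeSet (pvEvenA numbers) pairV fuel q parent).1.keys ∧
        pairV.get? g = none) ∧
      ((pvBfsB numbers primeSet (pvEvenA numbers) pairV fuel q parent).2 = none →
        (∀ v ∈ parent.keys,
          v ∈ (pvBfsB numbers primeSet (pvEvenA numbers) pairV fuel q parent).1.keys) ∧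
        (∀ v ∈ (pvBfsB numbers primeSet (pvEvenA numbers) pairV fuel q parent).1.keys,
          v ∈ pvEvenA numbers) ∧
        (pvBfsB numbers primeSet (pvEvenA numbers) pairV fuel q parent).1.keys.Nodup ∧
        (∀ p ∈ q, ∀ v ∈ pvEvenA numbers, pvPrimePair numbers primeSet p.1 v = true →
          v ∈ (pvBfsB numbers primeSet (pvEvenA numbers) pairV fuel q parent).1.keys) ∧
        (∀ v ∈ (pvBfsB numbers primeSet (pvEvenA numbers) pairV fuel q parent).1.keys,
          ∃ w, pairV.get? v = some w ∧ ∀ v' ∈ pvEvenA numbers,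
            pvPrimePair numbers primeSet w v' = true →
              v' ∈ (pvBfsB numbers primeSet (pvEvenA numbers) pairV fuel q parent).1.keys)) := by
  intro fuel
  induction fuel with
  | zero =>
    intro q parent _ _ _ _ _ hmeas
    exact absurd hmeas (by omega)
  | succ f ihf =>
    intro q parent hnd hkE hPa hQ hCI hmeas
    cases q with
    | nil =>
      constructor
      · intro g hg
        cases hg
      · intro _
        refine ⟨fun v hv => hv, hkE, hnd, fun p hp => absurd hp (by simp), ?_⟩
        intro v hv
        obtain ⟨w, hget, hcl⟩ := hCI v hv
        refine ⟨w, hget, ?_⟩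
        rcases hcl with hin | hclo
        · exact absurd hin (by simp)
        · exact hclo
    | cons hd rest =>
      rcases hd with ⟨u, pu⟩
      obtain ⟨huO, hpu⟩ := hQ (u, pu) (List.mem_cons_self ..)
      have hpu1 : pu = none → u = s := by
        intro h
        rw [h] at hpu
        exact hpu
      have hpu2 : ∀ v0, pu = some v0 → v0 ∈ parent.keys ∧ pairV.get? v0 = some u := by
        intro v0 h
        rw [h] at hpu
        exact hpu
      have hscan := pvBScan numbers primeSet pairV s u pu huO (pvEvenA numbers) parent []
        (fun v hv => hv) hpu1 hpu2 hnd hkE hPa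
      rcases hr : pvScanB numbers primeSet pairV u pu (pvEvenA numbers) parent []
        with ⟨parent', apps', gopt⟩
      rw [hr] at hscan
      obtain ⟨⟨new, hnew⟩, hsnd, hskE, hsPa, ⟨tail, htail⟩, hssome, hsnone⟩ := hscan
      dsimp only at hnew hsnd hskE hsPa htail hssome hsnone
      rcases gopt with _ | g
      · -- no free even found by this vertex: continue the BFS
        obtain ⟨hN1, hN2, hN3, hN4⟩ := hsnone rfl
        rw [pvBfsB_cons_none numbers primeSet pairV f u pu rest parent parent' apps' hr]
        have hkeymono : ∀ t ∈ parent.keys, t ∈ parent'.keys := by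
          intro t ht
          rw [hnew]
          exact List.mem_append_left _ ht
        have hQ' : pvQInv pairV s parent' (rest ++ apps') numbers := by
          intro p hp
          rcases List.mem_append.1 hp with h | h
          · obtain ⟨h1, h2⟩ := hQ p (List.mem_cons_of_mem _ h)
            refine ⟨h1, ?_⟩
            rcases hpv : p.2 with _ | v0
            · rw [hpv] at h2
              exact h2
            · rw [hpv] at h2
              exact ⟨hkeymono v0 h2.1, h2.2⟩
          · rcases hN2 p h with hin | ⟨v, hv1, hv2, hv3⟩
            · exact absurd hin (by simp)
            · have hp1O : p.1 ∈ pvOddA numbers := (hval v (hskE v hv2) p.1 hv3).1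
              refine ⟨hp1O, ?_⟩
              rw [hv1]
              exact ⟨hv2, hv3⟩
        have hCI' : pvCInvB numbers primeSet pairV parent' (rest ++ apps') := by
          intro v hv
          rcases hN3 v hv with hin | ⟨w, hw1, hw2⟩
          · obtain ⟨w, hget, hcl⟩ := hCI v hin
            refine ⟨w, hget, ?_⟩
            rcases hcl with hqin | hclo
            · simp only [List.map_cons, List.mem_cons] at hqin
              rcases hqin with hwu | hwrest
              · -- w = u was just fully scanned
                right
                intro v' hv' he'
                rw [hwu] at he'
                exact hN1 v' hv' he'
              · left
                rw [List.map_append, List.mem_append]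
                exact Or.inl hwrest
            · exact Or.inr (fun v' hv' he' => hkeymono v' (hclo v' hv' he'))
          · refine ⟨w, hw1, Or.inl ?_⟩
            rw [List.map_append, List.mem_append]
            right
            exact List.mem_map.2 ⟨(w, some v), hw2, rfl⟩
        have hmeas' : (rest ++ apps').length
            + (pvEvenA numbers).countP (fun v => !(parent'.contains v)) < f := by
          rw [List.length_append]
          simp only [List.length_nil] at hN4
          simp only [List.length_cons] at hmeas
          omega
        have hres := ihf (rest ++ apps') parent' hsnd hskE hsPa hQ' hCI' hmeas'
        refine ⟨hres.1, ?_⟩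
        intro hnone
        obtain ⟨hmono, ha, hb, hc, hd2⟩ := hres.2 hnone
        refine ⟨fun v hv => hmono v (hkeymono v hv), ha, hb, ?_, hd2⟩
        intro p hp v hv he
        rcases List.mem_cons.1 hp with rfl | hprest
        · exact hmono v (hN1 v hv he)
        · exact hc p (List.mem_append_left _ hprest) v hv he
      · -- a free even was found
        rw [pvBfsB_cons_some numbers primeSet pairV f u g pu rest parent parent' apps' hr]
        constructor
        · intro g' hg'
          cases hg'
          obtain ⟨hg1, hg2⟩ := hssome g rfl
          exact ⟨hsnd, hsPa, hg1, hg2⟩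
        · intro h
          cases h

lemma pvBFlip (numbers primeSet : List Int) (s : Int) (pairV0 : PySem.Dict Int Int)
    (parent : PySem.Dict Int (Int × Option Int)) (hnd : parent.keys.Nodup)
    (hPa : pvPaInv numbers primeSet pairV0 s parent) :
    ∀ (fuel : Nat) (v : Int) (pairV : PySem.Dict Int Int),
      v ∈ parent.keys →
      parent.keys.idxOf v < fuel →
      (∀ p ∈ parent.items, parent.keys.idxOf p.1 ≤ parent.keys.idxOf v →
        ∀ v0, p.2.2 = some v0 → pairV.get? v0 = some p.2.1) →
      (∀ x : Int,
        pvCnt (pvEvenA numbers) (fun t => (pvFlipB parent fuel (some v) pairV).get? t) x +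
          (if pairV.get? v = some x then 1 else 0) =
        pvCnt (pvEvenA numbers) (fun t => pairV.get? t) x + (if x = s then 1 else 0)) ∧
      (pvValid numbers primeSet (fun t => pairV.get? t) →
        pvValid numbers primeSet (fun t => (pvFlipB parent fuel (some v) pairV).get? t)) := by
  intro fuel
  induction fuel with
  | zero =>
    intro v pairV hv hidx _
    exact absurd hidx (by omega)
  | succ f ihf =>
    intro v pairV hv hidx hH2
    have hgetsome : (parent.get? v).isSome := by
      rcases hg : parent.get? v with _ | e
      · rw [PySem.Dict.get?_eq_none_iff_not_mem_keys] at hg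
        exact absurd hv hg
      · rfl
    rcases hg : parent.get? v with _ | e
    · rw [hg] at hgetsome
      cases hgetsome
    rcases e with ⟨u, pv⟩
    have hitem : (v, (u, pv)) ∈ parent.items :=
      PySem.Dict.mem_items_of_get?_eq_some parent hg
    obtain ⟨hvE, huO, hedge, hmatch⟩ := hPa (v, (u, pv)) hitem
    dsimp only at hvE huO hedge hmatch
    rw [pvFlipB_step parent f v u pv pairV hg]
    have hstep := fun x => pvCnt_update (pvEven_nodup numbers) hvE
      (fun t => pairV.get? t) (fun t => (pairV.insert v u).get? t)
      (fun t ht htv => (PySem.Dict.get?_insert_of_ne pairV u htv).symm) x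
    have hinsself : (pairV.insert v u).get? v = some u := PySem.Dict.get?_insert_self pairV v u
    have hvalstep : pvValid numbers primeSet (fun t => pairV.get? t) →
        pvValid numbers primeSet (fun t => (pairV.insert v u).get? t) := by
      intro hval t ht w hw
      simp only at hw
      by_cases htv : t = v
      · subst htv
        rw [hinsself] at hw
        cases hw
        exact ⟨huO, hedge⟩
      · rw [PySem.Dict.get?_insert_of_ne pairV u htv] at hw
        exact hval t ht w hw
    rcases hpv : pv with _ | v0
    · -- the chain ends: u is the free source s
      rw [hpv] at hmatch
      rw [pvFlipB_none]
      constructor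
      · intro x
        have h := hstep x
        rw [hinsself] at h
        have : (if (some u : Option Int) = some x then (1:Nat) else 0)
            = if x = s then 1 else 0 := by
          rw [hmatch]
          by_cases hx : x = s
          · rw [hx]
            simp
          · rw [if_neg hx, if_neg]
            intro e
            exact hx (Option.some_inj.1 e).symm
        rw [this] at h
        exact h
      · exact hvalstep
    · -- follow the chain
      rw [hpv] at hmatch
      obtain ⟨hm0, hidx0, _⟩ := hmatch
      have hcur : pairV.get? v0 = some u := by
        apply hH2 (v, (u, pv)) hitem (le_refl _) v0
        dsimp only
        rw [hpv]
      have hvne : v0 ≠ v := by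
        intro e
        rw [e] at hidx0
        omega
      have hH2' : ∀ p ∈ parent.items, parent.keys.idxOf p.1 ≤ parent.keys.idxOf v0 →
          ∀ v0', p.2.2 = some v0' → (pairV.insert v u).get? v0' = some p.2.1 := by
        intro p hp hple v0' hv0'
        obtain ⟨_, _, _, hm⟩ := hPa p hp
        rw [hv0'] at hm
        obtain ⟨_, hidxlt, _⟩ := hm
        have hne : v0' ≠ v := by
          intro e
          rw [e] at hidxlt
          omega
        rw [PySem.Dict.get?_insert_of_ne pairV u hne]
        exact hH2 p hp (by omega) v0' hv0'
      have hrec := ihf v0 (pairV.insert v u) hm0 (by omega) hH2'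
      constructor
      · intro x
        have h1 := hstep x
        rw [hinsself] at h1
        have h2 := hrec.1 x
        rw [PySem.Dict.get?_insert_of_ne pairV u hvne, hcur] at h2
        omega
      · intro hval
        exact hrec.2 (hvalstep hval)

lemma pvOuterB_nil (numbers primeSet : List Int) (nn : Nat) (pairV : PySem.Dict Int Int) :
    pvOuterB numbers primeSet (pvEvenA numbers) nn [] pairV = true := rfl

lemma pvOuterB_cons_none (numbers primeSet : List Int) (nn : Nat) (s : Int) (ss : List Int)
    (pairV : PySem.Dict Int Int) (parent : PySem.Dict Int (Int × Option Int))
    (hr : pvBfsB numbers primeSet (pvEvenA numbers) pairV (nn + 2) [(s, none)]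
      PySem.Dict.empty = (parent, none)) :
    pvOuterB numbers primeSet (pvEvenA numbers) nn (s :: ss) pairV = false := by
  simp [pvOuterB, hr]

lemma pvOuterB_cons_some (numbers primeSet : List Int) (nn : Nat) (s g : Int) (ss : List Int)
    (pairV : PySem.Dict Int Int) (parent : PySem.Dict Int (Int × Option Int))
    (hr : pvBfsB numbers primeSet (pvEvenA numbers) pairV (nn + 2) [(s, none)]
      PySem.Dict.empty = (parent, some g)) :
    pvOuterB numbers primeSet (pvEvenA numbers) nn (s :: ss) pairV
      = pvOuterB numbers primeSet (pvEvenA numbers) nn ss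
          (pvFlipB parent (parent.size + 1) (some g) pairV) := by
  simp [pvOuterB, hr]

lemma pvBOuter (numbers primeSet : List Int) :
    ∀ (ss P : List Int) (pairV : PySem.Dict Int Int),
      pvOddA numbers = P ++ ss →
      pvValid numbers primeSet (fun t => pairV.get? t) →
      pvCounts numbers (fun t => pairV.get? t) P →
      (pvOuterB numbers primeSet (pvEvenA numbers) numbers.length ss pairV = true →
        pvCov numbers primeSet) ∧
      (pvOuterB numbers primeSet (pvEvenA numbers) numbers.length ss pairV = false →
        ¬ pvCov numbers primeSet) := by
  intro ss
  induction ss with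
  | nil =>
    intro P pairV hsplit hval hcnt
    rw [pvOuterB_nil]
    constructor
    · intro _
      apply pvCov_of_full numbers primeSet (fun t => pairV.get? t) hval
      have hP : P = pvOddA numbers := by rw [hsplit, List.append_nil]
      exact hP ▸ hcnt
    · intro h
      cases h
  | cons s ss ih =>
    intro P pairV hsplit hval hcnt
    have hs : s ∈ pvOddA numbers := by
      rw [hsplit]
      exact List.mem_append.2 (Or.inr (List.mem_cons_self ..))
    have hnd := pvOdd_nodup numbers
    rw [hsplit] at hnd
    have hsP : s ∉ P := fun hup =>
      (List.disjoint_of_nodup_append hnd) hup (List.mem_cons_self ..)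
    have hQ0 : pvQInv pairV s PySem.Dict.empty [(s, none)] numbers := by
      intro p hp
      rw [List.mem_singleton.1 hp]
      exact ⟨hs, rfl⟩
    have hPa0 : pvPaInv numbers primeSet pairV s PySem.Dict.empty := by
      intro p hp
      exact absurd hp (by simp [PySem.Dict.empty, PySem.Dict.items])
    have hCI0 : pvCInvB numbers primeSet pairV PySem.Dict.empty [(s, none)] := by
      intro v hv
      exact absurd hv (by simp [PySem.Dict.empty, PySem.Dict.keys, PySem.Dict.items])
    have hk0 : (PySem.Dict.empty : PySem.Dict Int (Int × Option Int)).keys = [] := by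
      simp [PySem.Dict.empty, PySem.Dict.keys, PySem.Dict.items]
    have hmeas0 : (1 : Nat) + (pvEvenA numbers).countP
        (fun v => !((PySem.Dict.empty : PySem.Dict Int (Int × Option Int)).contains v))
        < numbers.length + 2 := by
      have h1 : (pvEvenA numbers).countP
          (fun v => !((PySem.Dict.empty : PySem.Dict Int (Int × Option Int)).contains v))
          ≤ (pvEvenA numbers).length := List.countP_le_length
      have := pvEven_len_le numbers
      omega
    have hbfs := pvBBfs numbers primeSet pairV s hval (numbers.length + 2) [(s, none)]
      PySem.Dict.empty (by rw [hk0]; exact List.nodup_nil)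
      (by rw [hk0]; intro v hv; cases hv) hPa0 hQ0 hCI0 (by simpa using hmeas0)
    rcases hr : pvBfsB numbers primeSet (pvEvenA numbers) pairV (numbers.length + 2)
        [(s, none)] PySem.Dict.empty with ⟨parent, gopt⟩
    rw [hr] at hbfs
    rcases gopt with _ | g
    · -- no augmenting path from s: a Hall certificate refutes any perfect matching
      rw [pvOuterB_cons_none numbers primeSet numbers.length s ss pairV parent hr]
      refine ⟨fun h => absurd h (by simp), fun _ => ?_⟩
      obtain ⟨_, hkE, hknd, hqN, hclo⟩ := hbfs.2 rfl
      dsimp only at hkE hknd hqN hclo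
      apply pvNoCov_of_state numbers primeSet (fun t => pairV.get? t) P s parent.keys
        hval hcnt hs hsP hknd hkE
      · intro v hv he
        exact hqN (s, none) (List.mem_singleton.2 rfl) v hv he
      · intro v hv
        exact hclo v hv
    · -- augment along the found path
      rw [pvOuterB_cons_some numbers primeSet numbers.length s g ss pairV parent hr]
      obtain ⟨hknd, hPa, hgmem, hgfree⟩ := hbfs.1 g rfl
      dsimp only at hknd hPa hgmem hgfree
      have hsize : parent.size = parent.keys.length := by
        unfold PySem.Dict.size PySem.Dict.keys
        simp
      have hflip := pvBFlip numbers primeSet s pairV parent hknd hPa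
        (parent.size + 1) g pairV hgmem
        (by rw [hsize]; have := List.idxOf_lt_length_of_mem hgmem; omega)
        (by
          intro p hp _ v0 hv0
          obtain ⟨_, _, _, hm⟩ := hPa p hp
          rw [hv0] at hm
          exact hm.2.2)
      have hval' := hflip.2 hval
      have hcnt' : pvCounts numbers
          (fun t => (pvFlipB parent (parent.size + 1) (some g) pairV).get? t)
          (P ++ [s]) := by
        intro x hx
        have h := hflip.1 x
        rw [hgfree] at h
        have hz : (if (none : Option Int) = some x then (1:Nat) else 0) = 0 := by simp
        rw [hz] at h
        have hc := hcnt x hx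
        by_cases hxs : x = s
        · subst hxs
          rw [if_pos (List.mem_append.2 (Or.inr (List.mem_singleton.2 rfl)))]
          rw [if_neg hsP] at hc
          rw [if_pos rfl] at h
          omega
        · have hmm : (x ∈ P ++ [s]) ↔ (x ∈ P) := by
            rw [List.mem_append, List.mem_singleton]
            exact ⟨fun h => h.resolve_right hxs, Or.inl⟩
          rw [if_neg hxs] at h
          by_cases hxP : x ∈ P
          · rw [if_pos (hmm.2 hxP)]
            rw [if_pos hxP] at hc
            omega
          · rw [if_neg (fun hh => hxP (hmm.1 hh))]
            rw [if_neg hxP] at hc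
            omega
      exact ih (P ++ [s]) (pvFlipB parent (parent.size + 1) (some g) pairV)
        (by rw [hsplit, List.append_assoc]; rfl) hval' hcnt'

-- ===== VERDICT (by name: the statement is the Claim_ definition above) =====
theorem canMatch_spec : Claim_equal_canMatch := by
  intro numbers primeSet _
  unfold Spec_canMatch
  simp only [canMatch, canMatch_alt]
  have hg : (PySem.Int.mod (numbers.length : Int) 2 != 0 || ((numbers.length : Int) == 0))
      = (((numbers.length : Int) == 0) || (PySem.Int.mod (numbers.length : Int) 2 == 1)) := by
    rcases pvModTwo (numbers.length : Int) with h | h <;> rw [h] <;> simp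
  rw [hg]
  by_cases h1 : (((numbers.length : Int) == 0) || (PySem.Int.mod (numbers.length : Int) 2 == 1))
  · simp only [h1, if_true]
  · simp only [h1, Bool.false_eq_true, if_false]
    by_cases h2 : ((pvOddA numbers).length != (pvEvenA numbers).length)
    · simp only [h2, if_true]
    · simp only [h2, Bool.false_eq_true, if_false]
      have hA := pvAOuter numbers primeSet (pvOddA numbers) [] 
        (List.replicate numbers.length (-1)) (List.replicate numbers.length (-1))
        (by simp)
        (by intro v hv w hw
            simp only [pvGA, pvGetD_replicate_const] at hw
            simp at hw)
        (by intro x hx; simp only [List.not_mem_nil, if_false]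
            unfold pvCnt
            rw [List.countP_eq_length_filter, List.filter_eq_nil_iff.2 ?_]
            · rfl
            · intro v hv
              simp [pvGA, pvGetD_replicate_const])
        (by simp)
      have hB := pvBOuter numbers primeSet (pvOddA numbers) [] PySem.Dict.empty
        (by simp)
        (by intro v hv w hw
            simp only [PySem.Dict.get?_empty] at hw
            exact absurd hw (by simp))
        (by intro x hx; simp only [List.not_mem_nil, if_false]
            unfold pvCnt
            rw [List.countP_eq_length_filter, List.filter_eq_nil_iff.2 ?_]
            · rfl
            · intro v hv
              simp [PySem.Dict.get?_empty])
      rcases hres : pvOuterA (pvAdjA numbers primeSet) numbers.length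
          (List.replicate numbers.length (-1)) (List.replicate numbers.length (-1))
          (pvOddA numbers) with _ | _
      · rcases hres2 : pvOuterB numbers primeSet (pvEvenA numbers) numbers.length
            (pvOddA numbers) PySem.Dict.empty with _ | _
        · rfl
        · exact absurd (hB.1 hres2) (hA.2 hres)
      · rcases hres2 : pvOuterB numbers primeSet (pvEvenA numbers) numbers.length
            (pvOddA numbers) PySem.Dict.empty with _ | _
        · exact absurd (hA.1 hres) (hB.2 hres2)
        · rfl
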